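-- pv_equiv track=rewrite | github.com/coilysiren/eco-map-generator | eco_cycle_prep/narrative/features.py | _water_components
-- ===== SOURCE A (Python) =====
-- from collections import Counter, deque
--
-- def _water_components(water_mask: list[list[bool]]) -> tuple[int, int, int]:
--     """Return (open_ocean_pixels, lake_count, ocean_component_count).
--
--     Heuristic: the component(s) touching the image edge are ocean; interior
--     components ≥ MIN_LAKE_PIXELS are lakes. Anything smaller is noise
--     (river segment artefacts, isolated single-pixel submerged cells)."""
--     h = len(water_mask)
--     w = len(water_mask[0]) if h else 0
--     MIN_LAKE_PIXELS = max(16, (w * h) // 2000)  # ~0.05% of world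
--     seen = [[False] * w for _ in range(h)]
--     open_ocean = 0
--     lakes = 0
--     oceans = 0
--     for y0 in range(h):
--         for x0 in range(w):
--             if not water_mask[y0][x0] or seen[y0][x0]:
--                 continue
--             size = 0
--             touches_edge = False
--             q: deque[tuple[int, int]] = deque([(x0, y0)])
--             seen[y0][x0] = True
--             while q:
--                 x, y = q.popleft()
--                 size += 1
--                 if x == 0 or y == 0 or x == w - 1 or y == h - 1:
--                     touches_edge = True
--                 for dx, dy in ((1, 0), (-1, 0), (0, 1), (0, -1)):
--                     nx, ny = x + dx, y + dy
--                     if 0 <= nx < w and 0 <= ny < h and water_mask[ny][nx] and not seen[ny][nx]: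
--                         seen[ny][nx] = True
--                         q.append((nx, ny))
--             if touches_edge:
--                 open_ocean += size
--                 oceans += 1
--             elif size >= MIN_LAKE_PIXELS:
--                 lakes += 1
--     return open_ocean, lakes, oceans
-- ===== SOURCE B (Python) =====
-- def _water_components(water_mask):
--     """Union-find re-implementation: union each water cell with its right/down
--     water neighbours, then aggregate size and edge-contact per root."""
--     h = len(water_mask)
--     w = len(water_mask[0]) if h else 0
--     MIN_LAKE_PIXELS = max(16, (w * h) // 2000)
--     parent = {}
--     for y in range(h):
--         for x in range(w):
--             if water_mask[y][x]:
--                 parent[(y, x)] = (y, x)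
--
--     def find(c):
--         while parent[c] != c:
--             parent[c] = parent[parent[c]]  # path halving
--             c = parent[c]
--         return c
--
--     def union(a, b):
--         ra, rb = find(a), find(b)
--         if ra != rb:
--             # link the (row-major) larger root under the smaller one
--             if ra < rb:
--                 parent[rb] = ra
--             else:
--                 parent[ra] = rb
--
--     for y in range(h):
--         for x in range(w):
--             if (y, x) not in parent:
--                 continue
--             if x + 1 < w and (y, x + 1) in parent:
--                 union((y, x), (y, x + 1))
--             if y + 1 < h and (y + 1, x) in parent:
--                 union((y, x), (y + 1, x))
--
--     size = {}
--     touches = {}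
--     for y in range(h):
--         for x in range(w):
--             if (y, x) not in parent:
--                 continue
--             r = find((y, x))
--             size[r] = size.get(r, 0) + 1
--             touches[r] = touches.get(r, False) or x == 0 or y == 0 or x == w - 1 or y == h - 1
--
--     open_ocean = 0
--     lakes = 0
--     oceans = 0
--     for r, s in size.items():
--         if touches[r]:
--             open_ocean += s
--             oceans += 1
--         elif s >= MIN_LAKE_PIXELS:
--             lakes += 1
--     return open_ocean, lakes, oceans
-- ===== Notes on version B (the rewrite author's own statement) =====
-- stated objective: alternative
-- what changed: Replaces the seeded BFS flood fill (deque + seen matrix) by a disjoint-set union-find: every water cell is united with its right/down water neighbour (union by row-major-smaller root, path halving), then one aggregation pass accumulates per-root component size and edge contact.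
import Mathlib
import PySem

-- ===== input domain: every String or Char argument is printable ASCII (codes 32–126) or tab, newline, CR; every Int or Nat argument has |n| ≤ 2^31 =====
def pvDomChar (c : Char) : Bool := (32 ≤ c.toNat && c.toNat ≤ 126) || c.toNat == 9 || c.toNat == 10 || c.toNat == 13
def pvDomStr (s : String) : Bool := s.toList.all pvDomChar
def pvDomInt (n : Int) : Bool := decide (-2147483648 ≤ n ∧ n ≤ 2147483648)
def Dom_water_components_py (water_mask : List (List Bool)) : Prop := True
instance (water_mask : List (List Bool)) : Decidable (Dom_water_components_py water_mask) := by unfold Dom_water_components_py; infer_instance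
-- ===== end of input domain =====

-- B replaces A's seeded BFS flood fill by a dict-based union-find (union by row-major
-- smaller root, path halving); equal counts are proved via the components' row-major minima.

-- ===== PORT A =====
-- in-range grid read water_mask[y][x] (all reads are in range under Pre_, where every row has length ≥ w)
def pvWat (g : List (List Bool)) (y x : Nat) : Bool := (g.getD y []).getD x false

-- body of "for dx, dy in ((1,0),(-1,0),(0,1),(0,-1))": push unseen in-bounds water neighbours
def pvNbStep (g : List (List Bool)) (h w x y : Nat)
    (st : List (Nat × Nat) × Finset (Nat × Nat)) (d : Int × Int) :
    List (Nat × Nat) × Finset (Nat × Nat) :=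
  let nx : Int := (x : Int) + d.1
  let ny : Int := (y : Int) + d.2
  if 0 ≤ nx ∧ nx < (w : Int) ∧ 0 ≤ ny ∧ ny < (h : Int) ∧
      pvWat g ny.toNat nx.toNat = true ∧ (ny.toNat, nx.toNat) ∉ st.2 then
    (st.1 ++ [(nx.toNat, ny.toNat)], insert (ny.toNat, nx.toNat) st.2)
  else st

-- the "while q:" BFS loop; queue holds (x, y) as in the Python, the seen matrix is
-- represented by the set of marked cells (y, x); fuel only makes the loop total, h*w+1 always suffices
def pvBfs (g : List (List Bool)) (h w : Nat) :
    Nat → List (Nat × Nat) → Finset (Nat × Nat) → Nat → Bool →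
      Finset (Nat × Nat) × Nat × Bool
  | 0, _, seen, size, touch => (seen, size, touch)
  | _ + 1, [], seen, size, touch => (seen, size, touch)
  | fuel + 1, (x, y) :: q, seen, size, touch =>
      let size := size + 1
      let touch := touch || (x == 0 || y == 0 || x == w - 1 || y == h - 1)
      let st := [((1 : Int), (0 : Int)), (-1, 0), (0, 1), (0, -1)].foldl
        (pvNbStep g h w x y) (q, seen)
      pvBfs g h w fuel st.1 st.2 size touch

-- body of the doubly nested seed loop (state: seen, open_ocean, lakes, oceans)
def pvSeedStep (g : List (List Bool)) (h w minLake : Nat)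
    (st : Finset (Nat × Nat) × Nat × Nat × Nat) (y0 x0 : Nat) :
    Finset (Nat × Nat) × Nat × Nat × Nat :=
  if pvWat g y0 x0 = true ∧ (y0, x0) ∉ st.1 then
    let r := pvBfs g h w (h * w + 1) [(x0, y0)] (insert (y0, x0) st.1) 0 false
    if r.2.2 = true then (r.1, st.2.1 + r.2.1, st.2.2.1, st.2.2.2 + 1)
    else if r.2.1 ≥ minLake then (r.1, st.2.1, st.2.2.1 + 1, st.2.2.2)
    else (r.1, st.2.1, st.2.2.1, st.2.2.2)
  else st

def water_components_py (water_mask : List (List Bool)) : Int × Int × Int :=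
  let h := water_mask.length
  let w := if h = 0 then 0 else (water_mask.headD []).length
  let minLake := max 16 (w * h / 2000)
  let st := (List.range h).foldl (fun st y0 =>
      (List.range w).foldl (fun st x0 => pvSeedStep water_mask h w minLake st y0 x0) st)
    ((∅ : Finset (Nat × Nat)), 0, 0, 0)
  ((st.2.1 : Int), (st.2.2.1 : Int), (st.2.2.2 : Int))

-- ===== PORT B =====
-- Python tuple comparison (y1, x1) < (y2, x2)
def pvLex (a b : Nat × Nat) : Bool := a.1 < b.1 || (a.1 == b.1 && a.2 < b.2)

-- "while parent[c] != c: parent[c] = parent[parent[c]]; c = parent[c]" (path halving);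
-- fuel only makes the loop total, h*w+1 always suffices
def pvFind : Nat → PySem.Dict (Nat × Nat) (Nat × Nat) → (Nat × Nat) →
    PySem.Dict (Nat × Nat) (Nat × Nat) × (Nat × Nat)
  | 0, parent, c => (parent, c)
  | fuel + 1, parent, c =>
      let p := parent.getD c c
      if p = c then (parent, c)
      else
        let pp := parent.getD p p
        pvFind fuel (parent.insert c pp) pp

def pvUnion (n : Nat) (parent : PySem.Dict (Nat × Nat) (Nat × Nat)) (a b : Nat × Nat) :
    PySem.Dict (Nat × Nat) (Nat × Nat) :=
  let fa := pvFind (n + 1) parent a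
  let fb := pvFind (n + 1) fa.1 b
  let ra := fa.2
  let rb := fb.2
  if ra = rb then fb.1
  else if pvLex ra rb = true then fb.1.insert rb ra
  else fb.1.insert ra rb

-- body of the union pass for one cell
def pvUnionStep (g : List (List Bool)) (h w n : Nat)
    (d : PySem.Dict (Nat × Nat) (Nat × Nat)) (y x : Nat) :
    PySem.Dict (Nat × Nat) (Nat × Nat) :=
  if d.contains (y, x) = true then
    let d := if x + 1 < w ∧ d.contains (y, x + 1) = true then pvUnion n d (y, x) (y, x + 1) else d
    if y + 1 < h ∧ d.contains (y + 1, x) = true then pvUnion n d (y, x) (y + 1, x) else d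
  else d

-- body of the aggregation pass for one cell (state: parent, size, touches)
def pvAggStep (h w n : Nat)
    (st : PySem.Dict (Nat × Nat) (Nat × Nat) × PySem.Dict (Nat × Nat) Nat ×
      PySem.Dict (Nat × Nat) Bool) (y x : Nat) :
    PySem.Dict (Nat × Nat) (Nat × Nat) × PySem.Dict (Nat × Nat) Nat ×
      PySem.Dict (Nat × Nat) Bool :=
  if st.1.contains (y, x) = true then
    let f := pvFind (n + 1) st.1 (y, x)
    let r := f.2
    let sz := st.2.1.insert r (st.2.1.getD r 0 + 1)
    let tc := st.2.2.insert r (st.2.2.getD r false || x == 0 || y == 0 || x == w - 1 || y == h - 1)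
    (f.1, sz, tc)
  else st

def water_components_py_alt (water_mask : List (List Bool)) : Int × Int × Int :=
  let h := water_mask.length
  let w := if h = 0 then 0 else (water_mask.headD []).length
  let minLake := max 16 (w * h / 2000)
  let n := h * w
  let parent0 : PySem.Dict (Nat × Nat) (Nat × Nat) :=
    (List.range h).foldl (fun d y => (List.range w).foldl (fun d x =>
      if pvWat water_mask y x = true then d.insert (y, x) (y, x) else d) d) .empty
  let parent1 := (List.range h).foldl (fun d y => (List.range w).foldl (fun d x =>
      pvUnionStep water_mask h w n d y x) d) parent0
  let st := (List.range h).foldl (fun st y => (List.range w).foldl (fun st x =>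
      pvAggStep h w n st y x) st) (parent1, (.empty : PySem.Dict (Nat × Nat) Nat),
        (.empty : PySem.Dict (Nat × Nat) Bool))
  let res := st.2.1.items.foldl (fun acc p =>
      if st.2.2.getD p.1 false = true then (acc.1 + p.2, acc.2.1, acc.2.2 + 1)
      else if p.2 ≥ minLake then (acc.1, acc.2.1 + 1, acc.2.2)
      else acc) ((0, 0, 0) : Nat × Nat × Nat)
  ((res.1 : Int), (res.2.1 : Int), (res.2.2 : Int))

-- ===== PRECONDITION & SPEC =====
-- Pre_ excludes exactly the grids on which the Python A raises IndexError: those with a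
-- row shorter than the first row (the BFS indexes every row up to len(water_mask[0])).
-- The Lean ports read absent cells as False, so the equivalence proof below does not need
-- Pre_; it only delimits the inputs on which the Python A returns at all.
def Pre_water_components_py (water_mask : List (List Bool)) : Prop :=
  ∀ row ∈ water_mask, (water_mask.headD []).length ≤ row.length
instance (water_mask : List (List Bool)) : Decidable (Pre_water_components_py water_mask) := by
  unfold Pre_water_components_py; infer_instance

def pvWitness_water_components_py : List (List Bool) := [[true, false], [false, true]]

def Spec_water_components_py (water_mask : List (List Bool)) (out : Int × Int × Int) : Prop :=
  out = water_components_py_alt water_mask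
instance (water_mask : List (List Bool)) (out : Int × Int × Int) :
    Decidable (Spec_water_components_py water_mask out) := by
  unfold Spec_water_components_py; infer_instance

-- ===== CLAIM (what is proved, stated in full; the proofs are below) =====
def Claim_equal_water_components_py : Prop :=
  ∀ (water_mask : List (List Bool)), Dom_water_components_py water_mask →
    Pre_water_components_py water_mask →
    Spec_water_components_py water_mask (water_components_py water_mask)

-- ===== LEMMAS AND PROOFS =====

-- ---- spec-side definitions (proof layer only) ----
def sH (g : List (List Bool)) : Nat := g.length
def sW (g : List (List Bool)) : Nat := (g.headD []).length
def sN (g : List (List Bool)) : Nat := sH g * sW g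
def cellOf (g : List (List Bool)) (k : Nat) : Nat × Nat := (k / sW g, k % sW g)
def sOrd (g : List (List Bool)) (c : Nat × Nat) : Nat := c.1 * sW g + c.2
def sWater (g : List (List Bool)) (c : Nat × Nat) : Bool :=
  decide (c.1 < sH g) && decide (c.2 < sW g) && pvWat g c.1 c.2
def sBorder (g : List (List Bool)) (c : Nat × Nat) : Bool :=
  c.2 == 0 || c.1 == 0 || c.2 == sW g - 1 || c.1 == sH g - 1
def sAdj (g : List (List Bool)) (c d : Nat × Nat) : Prop :=
  sWater g c = true ∧ sWater g d = true ∧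
    ((c.1 = d.1 ∧ (c.2 + 1 = d.2 ∨ d.2 + 1 = c.2)) ∨
     (c.2 = d.2 ∧ (c.1 + 1 = d.1 ∨ d.1 + 1 = c.1)))
def sConn (g : List (List Bool)) : (Nat × Nat) → (Nat × Nat) → Prop :=
  Relation.ReflTransGen (sAdj g)
noncomputable def sComp (g : List (List Bool)) (c : Nat × Nat) : Finset (Nat × Nat) :=
  @Finset.filter _ (fun d => sConn g c d) (fun _ => Classical.propDecidable _)
    (Finset.range (sH g) ×ˢ Finset.range (sW g))
noncomputable def sEdgeB (g : List (List Bool)) (c : Nat × Nat) : Bool :=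
  @decide (∃ d ∈ sComp g c, sBorder g d = true) (Classical.propDecidable _)
def sRep (g : List (List Bool)) (c : Nat × Nat) : Prop :=
  sWater g c = true ∧ ∀ d, sConn g c d → sOrd g c ≤ sOrd g d
noncomputable def sRepB (g : List (List Bool)) (c : Nat × Nat) : Bool :=
  @decide (sRep g c) (Classical.propDecidable _)
noncomputable def sRepsIdx (g : List (List Bool)) (k : Nat) : List Nat :=
  (List.range k).filter (fun j => sRepB g (cellOf g j))
def sAggStep (minLake : Nat) (acc : Nat × Nat × Nat) (p : Nat × Bool) : Nat × Nat × Nat :=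
  if p.2 = true then (acc.1 + p.1, acc.2.1, acc.2.2 + 1)
  else if p.1 ≥ minLake then (acc.1, acc.2.1 + 1, acc.2.2)
  else acc
def sMinLake (g : List (List Bool)) : Nat := max 16 (sW g * sH g / 2000)
noncomputable def sTarget (g : List (List Bool)) : Nat × Nat × Nat :=
  ((sRepsIdx g (sN g)).map (fun j => ((sComp g (cellOf g j)).card, sEdgeB g (cellOf g j)))).foldl
    (sAggStep (sMinLake g)) (0, 0, 0)

-- ---- generic loop-shape lemmas ----
theorem nested_eq_single {α : Type} (f : α → Nat → Nat → α) (init : α) (h w : Nat) :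
    (List.range h).foldl (fun st y => (List.range w).foldl (fun st x => f st y x) st) init
      = (List.range (h * w)).foldl (fun st k => f st (k / w) (k % w)) init := by
  induction h generalizing init with
  | zero => simp
  | succ h ih =>
      rw [List.range_succ, List.foldl_append, ih, Nat.succ_mul, List.range_add,
        List.foldl_append, List.foldl_map]
      simp only [List.foldl_cons, List.foldl_nil]
      apply PySem.List.foldl_congr_mem
      intro acc x hx
      have hxw : x < w := List.mem_range.mp hx
      have hw : 0 < w := by omega
      have h1 : (h * w + x) / w = h := by
        rw [Nat.add_comm, Nat.add_mul_div_right _ _ hw, Nat.div_eq_of_lt hxw]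
        omega
      have h2 : (h * w + x) % w = x := by
        rw [Nat.add_comm, Nat.add_mul_mod_self_right, Nat.mod_eq_of_lt hxw]
      rw [h1, h2]

theorem foldl_range_succ {α : Type} (f : α → Nat → α) (init : α) (k : Nat) :
    (List.range (k + 1)).foldl f init = f ((List.range k).foldl f init) k := by
  rw [List.range_succ, List.foldl_append]; rfl

-- ---- basic facts about the grid graph ----
theorem sAdj_symm (g : List (List Bool)) : Symmetric (sAdj g) := by
  intro c d h
  obtain ⟨hc, hd, hrel⟩ := h
  exact ⟨hd, hc, by tauto⟩

theorem sConn_symm (g : List (List Bool)) : Symmetric (sConn g) :=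
  Relation.ReflTransGen.symmetric (sAdj_symm g)

theorem sConn_water (g : List (List Bool)) {c d : Nat × Nat}
    (h : sConn g c d) (hc : sWater g c = true) : sWater g d = true := by
  induction h with
  | refl => exact hc
  | tail _ hadj ih => exact hadj.2.1

theorem sWater_bounds (g : List (List Bool)) {c : Nat × Nat} (h : sWater g c = true) :
    c.1 < sH g ∧ c.2 < sW g := by
  simp only [sWater, Bool.and_eq_true, decide_eq_true_eq] at h
  exact ⟨h.1.1, h.1.2⟩

theorem sOrd_lt_n (g : List (List Bool)) {c : Nat × Nat} (h : sWater g c = true) :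
    sOrd g c < sN g := by
  obtain ⟨h1, h2⟩ := sWater_bounds g h
  have : c.1 * sW g + sW g ≤ sH g * sW g := by
    have := Nat.succ_le_of_lt h1
    calc c.1 * sW g + sW g = (c.1 + 1) * sW g := by ring
    _ ≤ sH g * sW g := Nat.mul_le_mul_right _ this
  simp only [sOrd, sN]; omega

theorem sOrd_inj (g : List (List Bool)) {c d : Nat × Nat}
    (hc : c.2 < sW g) (hd : d.2 < sW g) (h : sOrd g c = sOrd g d) : c = d := by
  simp only [sOrd] at h
  have : c.1 = d.1 := by
    rcases Nat.lt_trichotomy c.1 d.1 with h1 | h1 | h1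
    · exfalso
      have : c.1 * sW g + sW g ≤ d.1 * sW g := by
        calc c.1 * sW g + sW g = (c.1 + 1) * sW g := by ring
        _ ≤ d.1 * sW g := Nat.mul_le_mul_right _ h1
      omega
    · exact h1
    · exfalso
      have : d.1 * sW g + sW g ≤ c.1 * sW g := by
        calc d.1 * sW g + sW g = (d.1 + 1) * sW g := by ring
        _ ≤ c.1 * sW g := Nat.mul_le_mul_right _ h1
      omega
  have h2 : c.2 = d.2 := by
    rw [this] at h; omega
  exact Prod.ext this h2

theorem cellOf_sOrd (g : List (List Bool)) {c : Nat × Nat} (hc : c.2 < sW g) :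
    cellOf g (sOrd g c) = c := by
  have hw : 0 < sW g := by omega
  simp only [cellOf, sOrd]
  have h1 : (c.1 * sW g + c.2) / sW g = c.1 := by
    rw [Nat.mul_comm, Nat.mul_add_div hw, Nat.div_eq_of_lt hc]; omega
  have h2 : (c.1 * sW g + c.2) % sW g = c.2 := by
    rw [Nat.mul_comm, Nat.mul_add_mod, Nat.mod_eq_of_lt hc]
  rw [h1, h2]

theorem sOrd_cellOf (g : List (List Bool)) {k : Nat} (hk : k < sN g) :
    sOrd g (cellOf g k) = k := by
  have hw : 0 < sW g := by
    by_contra h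
    have : sW g = 0 := by omega
    simp [sN, this] at hk
  simp only [cellOf, sOrd]
  rw [Nat.mul_comm (k / sW g) (sW g)]
  exact Nat.div_add_mod k (sW g)

theorem cellOf_bounds (g : List (List Bool)) {k : Nat} (hk : k < sN g) :
    (cellOf g k).1 < sH g ∧ (cellOf g k).2 < sW g := by
  have hw : 0 < sW g := by
    by_contra h
    have : sW g = 0 := by omega
    simp [sN, this] at hk
  constructor
  · simp only [cellOf]
    exact Nat.div_lt_of_lt_mul (by simpa [sN, Nat.mul_comm] using hk)
  · exact Nat.mod_lt _ hw

theorem mem_sComp (g : List (List Bool)) {c d : Nat × Nat} (hc : sWater g c = true) :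
    d ∈ sComp g c ↔ sConn g c d := by
  simp only [sComp, Finset.mem_filter, Finset.mem_product, Finset.mem_range]
  constructor
  · exact fun h => h.2
  · intro h
    have := sWater_bounds g (sConn_water g h hc)
    exact ⟨⟨this.1, this.2⟩, h⟩

theorem sRepB_iff (g : List (List Bool)) (c : Nat × Nat) :
    sRepB g c = true ↔ sRep g c := by
  simp only [sRepB]
  exact @decide_eq_true_iff _ (Classical.propDecidable _)

theorem sRepsIdx_succ (g : List (List Bool)) (k : Nat) :
    sRepsIdx g (k + 1) =
      sRepsIdx g k ++ (if sRepB g (cellOf g k) = true then [k] else []) := by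
  simp only [sRepsIdx, List.range_succ, List.filter_append, List.filter_cons, List.filter_nil]

theorem pvW_eq (g : List (List Bool)) :
    (if g.length = 0 then 0 else (g.headD []).length) = sW g := by
  cases g <;> simp [sW]


-- ---- BFS (port A) correctness ----
def candList (g : List (List Bool)) (y x : Nat) : List (Bool × (Nat × Nat)) :=
  [(decide (x + 1 < sW g), (y, x + 1)), (decide (1 ≤ x), (y, x - 1)),
   (decide (y + 1 < sH g), (y + 1, x)), (decide (1 ≤ y), (y - 1, x))]

def candPred (g : List (List Bool)) (seen : Finset (Nat × Nat)) (p : Bool × (Nat × Nat)) : Bool :=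
  p.1 && pvWat g p.2.1 p.2.2 && decide (p.2 ∉ seen)

def newOf (g : List (List Bool)) (seen : Finset (Nat × Nat)) (y x : Nat) : List (Nat × Nat) :=
  ((candList g y x).filter (candPred g seen)).map Prod.snd

def candStep (g : List (List Bool)) (st : List (Nat × Nat) × Finset (Nat × Nat))
    (p : Bool × (Nat × Nat)) : List (Nat × Nat) × Finset (Nat × Nat) :=
  if p.1 = true ∧ pvWat g p.2.1 p.2.2 = true ∧ p.2 ∉ st.2 then
    (st.1 ++ [(p.2.2, p.2.1)], insert p.2 st.2)
  else st

theorem candList_pairwise (g : List (List Bool)) (y x : Nat) :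
    (candList g y x).Pairwise (fun a b => a.1 = true → b.1 = true → a.2 ≠ b.2) := by
  simp [candList, Prod.mk.injEq]
  omega

theorem candFold (g : List (List Bool)) :
    ∀ (L : List (Bool × (Nat × Nat))) (q : List (Nat × Nat)) (seen : Finset (Nat × Nat)),
      L.Pairwise (fun a b => a.1 = true → b.1 = true → a.2 ≠ b.2) →
      L.foldl (candStep g) (q, seen)
        = (q ++ (L.filter (candPred g seen)).map (fun p => (p.2.2, p.2.1)),
           seen ∪ ((L.filter (candPred g seen)).map Prod.snd).toFinset) := by
  intro L
  induction L with
  | nil => intro q seen _; simp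
  | cons p L ih =>
      intro q seen hpw
      have hpwt := (List.pairwise_cons.mp hpw).2
      have hhead := (List.pairwise_cons.mp hpw).1
      by_cases hp : candPred g seen p = true
      · have hp' : p.1 = true ∧ pvWat g p.2.1 p.2.2 = true ∧ p.2 ∉ seen := by
          simpa [candPred, and_assoc] using hp
        have hstep : candStep g (q, seen) p = (q ++ [(p.2.2, p.2.1)], insert p.2 seen) := by
          simp [candStep, hp'.1, hp'.2.1, hp'.2.2]
        rw [List.foldl_cons, hstep, ih _ _ hpwt]
        have hfeq : L.filter (candPred g (insert p.2 seen)) = L.filter (candPred g seen) := by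
          apply List.filter_congr
          intro a ha
          by_cases ha1 : a.1 = true
          · have hne : a.2 ≠ p.2 := fun he => (hhead a ha hp'.1 ha1 he.symm)
            simp [candPred, Finset.mem_insert, hne]
          · simp [candPred, Bool.eq_false_iff.mpr ha1]
        rw [hfeq, List.filter_cons_of_pos hp]
        simp only [Prod.mk.injEq, List.map_cons, List.toFinset_cons]
        constructor
        · simp
        · apply Finset.ext
          intro e
          simp only [Finset.mem_insert, Finset.mem_union, List.mem_toFinset]
          tauto
      · have hp' : ¬(p.1 = true ∧ pvWat g p.2.1 p.2.2 = true ∧ p.2 ∉ seen) := by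
          intro hc
          exact hp (by simp [candPred, hc.1, hc.2.1, hc.2.2])
        have hstep : candStep g (q, seen) p = (q, seen) := by
          simp only [candStep]
          exact if_neg hp'
        rw [List.foldl_cons, hstep, ih _ _ hpwt, List.filter_cons_of_neg (by simp [hp])]

theorem newOf_nodup (g : List (List Bool)) (seen : Finset (Nat × Nat)) (y x : Nat) :
    (newOf g seen y x).Nodup := by
  have h1 : ((candList g y x).filter (candPred g seen)).Pairwise
      (fun a b => a.1 = true → b.1 = true → a.2 ≠ b.2) :=
    (candList_pairwise g y x).sublist List.filter_sublist
  have h2 : ((candList g y x).filter (candPred g seen)).Pairwise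
      (fun a b => a.2 ≠ b.2) := by
    apply List.Pairwise.imp_of_mem ?_ h1
    intro a b ha hb hr
    have ha1 : a.1 = true := by
      have := List.of_mem_filter ha; simp [candPred] at this; exact this.1.1
    have hb1 : b.1 = true := by
      have := List.of_mem_filter hb; simp [candPred] at this; exact this.1.1
    exact hr ha1 hb1
  have h3 : (((candList g y x).filter (candPred g seen)).map Prod.snd).Pairwise (· ≠ ·) :=
    List.pairwise_map.mpr h2
  exact h3

theorem mem_newOf_elim (g : List (List Bool)) {seen : Finset (Nat × Nat)} {y x : Nat}
    {n : Nat × Nat} (hc : sWater g (y, x) = true) (hn : n ∈ newOf g seen y x) :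
    sWater g n = true ∧ n ∉ seen ∧ sAdj g (y, x) n := by
  have hy := (sWater_bounds g hc).1
  have hx := (sWater_bounds g hc).2
  simp only [newOf, List.mem_map, List.mem_filter] at hn
  obtain ⟨p, ⟨hmem, hpred⟩, hsnd⟩ := hn
  subst hsnd
  simp only [candList, List.mem_cons, List.not_mem_nil, or_false] at hmem
  rcases hmem with h | h | h | h <;> subst h <;>
    simp only [candPred, Bool.and_eq_true, decide_eq_true_eq] at hpred <;>
    obtain ⟨⟨hg1, hw⟩, hns⟩ := hpred
  · have hwn : sWater g (y, x + 1) = true := by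
      simp only [sWater, Bool.and_eq_true, decide_eq_true_eq]
      exact ⟨⟨hy, hg1⟩, hw⟩
    exact ⟨hwn, hns, hc, hwn, Or.inl ⟨rfl, Or.inl rfl⟩⟩
  · have hwn : sWater g (y, x - 1) = true := by
      simp only [sWater, Bool.and_eq_true, decide_eq_true_eq]
      exact ⟨⟨hy, by omega⟩, hw⟩
    exact ⟨hwn, hns, hc, hwn, Or.inl ⟨rfl, Or.inr (show x - 1 + 1 = x by omega)⟩⟩
  · have hwn : sWater g (y + 1, x) = true := by
      simp only [sWater, Bool.and_eq_true, decide_eq_true_eq]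
      exact ⟨⟨hg1, hx⟩, hw⟩
    exact ⟨hwn, hns, hc, hwn, Or.inr ⟨rfl, Or.inl rfl⟩⟩
  · have hwn : sWater g (y - 1, x) = true := by
      simp only [sWater, Bool.and_eq_true, decide_eq_true_eq]
      exact ⟨⟨by omega, hx⟩, hw⟩
    exact ⟨hwn, hns, hc, hwn, Or.inr ⟨rfl, Or.inr (show y - 1 + 1 = y by omega)⟩⟩

theorem mem_newOf_intro (g : List (List Bool)) {seen : Finset (Nat × Nat)} {y x : Nat}
    {d : Nat × Nat} (hadj : sAdj g (y, x) d) (hns : d ∉ seen) : d ∈ newOf g seen y x := by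
  obtain ⟨hc, hd, hrel⟩ := hadj
  have hdb := sWater_bounds g hd
  have hdw : pvWat g d.1 d.2 = true := by
    simp only [sWater, Bool.and_eq_true] at hd; exact hd.2
  simp only [newOf, List.mem_map, List.mem_filter]
  obtain ⟨d1, d2⟩ := d
  rcases hrel with ⟨e1, e2 | e2⟩ | ⟨e1, e2 | e2⟩
  · refine ⟨(decide (x + 1 < sW g), (y, x + 1)), ⟨?_, ?_⟩, ?_⟩
    · simp [candList]
    · simp only [candPred, Bool.and_eq_true, decide_eq_true_eq]
      refine ⟨⟨?_, ?_⟩, ?_⟩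
      · have : d2 < sW g := hdb.2
        omega
      · rw [show y = d1 from e1, show x + 1 = d2 from e2]; exact hdw
      · rw [show y = d1 from e1, show x + 1 = d2 from e2]; exact hns
    · rw [show y = d1 from e1, show x + 1 = d2 from e2]
  · refine ⟨(decide (1 ≤ x), (y, x - 1)), ⟨?_, ?_⟩, ?_⟩
    · simp [candList]
    · simp only [candPred, Bool.and_eq_true, decide_eq_true_eq]
      have e2' : d2 + 1 = x := e2
      refine ⟨⟨by omega, ?_⟩, ?_⟩
      · rw [show y = d1 from e1, show x - 1 = d2 by omega]; exact hdw
      · rw [show y = d1 from e1, show x - 1 = d2 by omega]; exact hns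
    · rw [show y = d1 from e1, show x - 1 = d2 by omega]
  · refine ⟨(decide (y + 1 < sH g), (y + 1, x)), ⟨?_, ?_⟩, ?_⟩
    · simp [candList]
    · simp only [candPred, Bool.and_eq_true, decide_eq_true_eq]
      refine ⟨⟨?_, ?_⟩, ?_⟩
      · have : d1 < sH g := hdb.1
        omega
      · rw [show y + 1 = d1 from e2, show x = d2 from e1]; exact hdw
      · rw [show y + 1 = d1 from e2, show x = d2 from e1]; exact hns
    · rw [show y + 1 = d1 from e2, show x = d2 from e1]
  · refine ⟨(decide (1 ≤ y), (y - 1, x)), ⟨?_, ?_⟩, ?_⟩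
    · simp [candList]
    · simp only [candPred, Bool.and_eq_true, decide_eq_true_eq]
      have e2' : d1 + 1 = y := e2
      refine ⟨⟨by omega, ?_⟩, ?_⟩
      · rw [show y - 1 = d1 by omega, show x = d2 from e1]; exact hdw
      · rw [show y - 1 = d1 by omega, show x = d2 from e1]; exact hns
    · rw [show y - 1 = d1 by omega, show x = d2 from e1]

theorem nbR (g : List (List Bool)) {y x : Nat} (hy : y < sH g) (hx : x < sW g)
    (st : List (Nat × Nat) × Finset (Nat × Nat)) :
    pvNbStep g (sH g) (sW g) x y st (1, 0)
      = if x + 1 < sW g ∧ pvWat g y (x + 1) = true ∧ (y, x + 1) ∉ st.2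
        then (st.1 ++ [(x + 1, y)], insert (y, x + 1) st.2) else st := by
  have e1 : ((x : Int) + 1).toNat = x + 1 := by omega
  have e2 : ((y : Int) + 0).toNat = y := by omega
  simp only [pvNbStep, e1, e2]
  split_ifs <;> first
    | rfl
    | (rename_i h1 h2
       first
         | (obtain ⟨a, b, c, d', hw, hm⟩ := h1; exact absurd ⟨by omega, hw, hm⟩ h2)
         | (obtain ⟨hg, hw, hm⟩ := h2; exact absurd ⟨by omega, by omega, by omega, by omega, hw, hm⟩ h1))

theorem nbL (g : List (List Bool)) {y x : Nat} (hy : y < sH g) (hx : x < sW g)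
    (st : List (Nat × Nat) × Finset (Nat × Nat)) :
    pvNbStep g (sH g) (sW g) x y st (-1, 0)
      = if 1 ≤ x ∧ pvWat g y (x - 1) = true ∧ (y, x - 1) ∉ st.2
        then (st.1 ++ [(x - 1, y)], insert (y, x - 1) st.2) else st := by
  have e1 : ((x : Int) + -1).toNat = x - 1 := by omega
  have e2 : ((y : Int) + 0).toNat = y := by omega
  simp only [pvNbStep, e1, e2]
  split_ifs <;> first
    | rfl
    | (rename_i h1 h2
       first
         | (obtain ⟨a, b, c, d', hw, hm⟩ := h1; exact absurd ⟨by omega, hw, hm⟩ h2)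
         | (obtain ⟨hg, hw, hm⟩ := h2; exact absurd ⟨by omega, by omega, by omega, by omega, hw, hm⟩ h1))

theorem nbD (g : List (List Bool)) {y x : Nat} (hy : y < sH g) (hx : x < sW g)
    (st : List (Nat × Nat) × Finset (Nat × Nat)) :
    pvNbStep g (sH g) (sW g) x y st (0, 1)
      = if y + 1 < sH g ∧ pvWat g (y + 1) x = true ∧ (y + 1, x) ∉ st.2
        then (st.1 ++ [(x, y + 1)], insert (y + 1, x) st.2) else st := by
  have e1 : ((x : Int) + 0).toNat = x := by omega
  have e2 : ((y : Int) + 1).toNat = y + 1 := by omega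
  simp only [pvNbStep, e1, e2]
  split_ifs <;> first
    | rfl
    | (rename_i h1 h2
       first
         | (obtain ⟨a, b, c, d', hw, hm⟩ := h1; exact absurd ⟨by omega, hw, hm⟩ h2)
         | (obtain ⟨hg, hw, hm⟩ := h2; exact absurd ⟨by omega, by omega, by omega, by omega, hw, hm⟩ h1))

theorem nbU (g : List (List Bool)) {y x : Nat} (hy : y < sH g) (hx : x < sW g)
    (st : List (Nat × Nat) × Finset (Nat × Nat)) :
    pvNbStep g (sH g) (sW g) x y st (0, -1)
      = if 1 ≤ y ∧ pvWat g (y - 1) x = true ∧ (y - 1, x) ∉ st.2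
        then (st.1 ++ [(x, y - 1)], insert (y - 1, x) st.2) else st := by
  have e1 : ((x : Int) + 0).toNat = x := by omega
  have e2 : ((y : Int) + -1).toNat = y - 1 := by omega
  simp only [pvNbStep, e1, e2]
  split_ifs <;> first
    | rfl
    | (rename_i h1 h2
       first
         | (obtain ⟨a, b, c, d', hw, hm⟩ := h1; exact absurd ⟨by omega, hw, hm⟩ h2)
         | (obtain ⟨hg, hw, hm⟩ := h2; exact absurd ⟨by omega, by omega, by omega, by omega, hw, hm⟩ h1))

-- the four-direction fold of pvNbStep, characterized
theorem fold4_eq (g : List (List Bool)) {y x : Nat} (hy : y < sH g) (hx : x < sW g)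
    (q : List (Nat × Nat)) (seen : Finset (Nat × Nat)) :
    [((1 : Int), (0 : Int)), (-1, 0), (0, 1), (0, -1)].foldl
        (pvNbStep g (sH g) (sW g) x y) (q, seen)
      = (q ++ (newOf g seen y x).map (fun c => (c.2, c.1)),
         seen ∪ (newOf g seen y x).toFinset) := by
  have hcand : ∀ (st : List (Nat × Nat) × Finset (Nat × Nat))
      (G : Prop) (_ : Decidable G) (cy cx : Nat),
      (if G ∧ pvWat g cy cx = true ∧ (cy, cx) ∉ st.2
       then (st.1 ++ [(cx, cy)], insert (cy, cx) st.2) else st)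
        = candStep g st (decide G, (cy, cx)) := by
    intro st G hG cy cx
    simp only [candStep, decide_eq_true_eq]
  rw [List.foldl_cons, List.foldl_cons, List.foldl_cons, List.foldl_cons, List.foldl_nil,
    nbR g hy hx, nbL g hy hx, nbD g hy hx, nbU g hy hx,
    hcand _ _ _ y (x + 1), hcand _ _ _ y (x - 1), hcand _ _ _ (y + 1) x, hcand _ _ _ (y - 1) x]
  have hfold := candFold g (candList g y x) q seen (candList_pairwise g y x)
  simp only [candList, List.foldl_cons, List.foldl_nil] at hfold
  rw [hfold]
  rw [newOf, List.map_map]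
  rfl

theorem comp_eq_of_closed (g : List (List Bool)) (S M : Finset (Nat × Nat)) (s : Nat × Nat)
    (hSdisj : ∀ c ∈ S, ¬ sConn g s c) (hs : sWater g s = true) (hsM : s ∈ M)
    (hM : ∀ c ∈ M, sConn g s c)
    (hclosed : ∀ c ∈ M, ∀ d, sAdj g c d → d ∈ S ∪ M) :
    M = sComp g s := by
  apply Finset.ext
  intro d
  rw [mem_sComp g hs]
  constructor
  · exact fun h => hM d h
  · intro h
    induction h with
    | refl => exact hsM
    | @tail c d hsc hadj ih =>
        have := hclosed c ih d hadj
        rcases Finset.mem_union.mp this with h' | h'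
        · exact absurd (Relation.ReflTransGen.tail hsc hadj) (fun hh => hSdisj d h' hh)
        · exact h'

theorem decide_congr {p q : Prop} (ip : Decidable p) (iq : Decidable q) (h : p ↔ q) :
    @decide p ip = @decide q iq := by
  cases ip with
  | isTrue hp =>
      cases iq with
      | isTrue hq => rfl
      | isFalse hq => exact absurd (h.mp hp) hq
  | isFalse hp =>
      cases iq with
      | isTrue hq => exact absurd (h.mpr hq) hp
      | isFalse hq => rfl

theorem bool_or_decide (p : Prop) (ip : Decidable p) (b : Bool) (q : Prop) (iq : Decidable q)
    (h : (p ∨ b = true) ↔ q) : (@decide p ip || b) = @decide q iq := by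
  cases b
  · have hpq : p ↔ q := by
      constructor
      · exact fun hp => h.mp (Or.inl hp)
      · intro hq
        rcases h.mpr hq with h1 | h1
        · exact h1
        · exact absurd h1 (by simp)
    rw [Bool.or_false]
    exact decide_congr ip iq hpq
  · have hq : q := h.mp (Or.inr rfl)
    rw [Bool.or_true]
    exact (decide_eq_true hq).symm

-- the terminal state of the BFS: queue empty (or fuel out with an empty queue forced)
theorem bfs_terminal (g : List (List Bool)) (S : Finset (Nat × Nat)) (s : Nat × Nat)
    (hSdisj : ∀ c ∈ S, ¬ sConn g s c) (hs : sWater g s = true)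
    (M : Finset (Nat × Nat)) (size : Nat) (touch : Bool)
    (hsM : s ∈ M) (hM : ∀ c ∈ M, sConn g s c)
    (hcl : ∀ c ∈ M, ∀ d, sAdj g c d → d ∈ S ∪ M)
    (hsize : size = (M.filter (fun c => (c.2, c.1) ∉ ([] : List (Nat × Nat)))).card)
    (htouch : touch = @decide (∃ c ∈ M, ((c.2, c.1) ∉ ([] : List (Nat × Nat))) ∧ sBorder g c = true)
      (Classical.propDecidable _)) (fuel : Nat) :
    pvBfs g (sH g) (sW g) fuel [] (S ∪ M) size touch
      = (S ∪ sComp g s, (sComp g s).card, sEdgeB g s) := by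
  have hMeq : M = sComp g s := comp_eq_of_closed g S M s hSdisj hs hsM hM hcl
  have hfe : ∀ X : Finset (Nat × Nat),
      X.filter (fun c => (c.2, c.1) ∉ ([] : List (Nat × Nat))) = X := by
    intro X
    apply Finset.filter_true_of_mem
    intro e _
    exact List.not_mem_nil
  have h1 : pvBfs g (sH g) (sW g) fuel [] (S ∪ M) size touch = (S ∪ M, size, touch) := by
    cases fuel <;> rfl
  rw [h1, hsize, htouch, hMeq]
  refine Prod.ext rfl (Prod.ext ?_ ?_)
  · show ((sComp g s).filter _).card = (sComp g s).card
    rw [hfe]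
  · rw [sEdgeB]
    apply decide_congr
    constructor
    · rintro ⟨e, he, -, hb⟩
      exact ⟨e, he, hb⟩
    · rintro ⟨e, he, hb⟩
      exact ⟨e, he, fun h => List.not_mem_nil h, hb⟩

theorem bfs_correct (g : List (List Bool)) (S : Finset (Nat × Nat)) (s : Nat × Nat)
    (hSw : ∀ c ∈ S, sWater g c = true)
    (hSclosed : ∀ c ∈ S, ∀ d, sAdj g c d → d ∈ S)
    (hSdisj : ∀ c ∈ S, ¬ sConn g s c)
    (hs : sWater g s = true) :
    ∀ (fuel : Nat) (q : List (Nat × Nat)) (M : Finset (Nat × Nat)) (size : Nat) (touch : Bool),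
      (∀ p ∈ q, (p.2, p.1) ∈ M) → ((q.map (fun p => (p.2, p.1))).Nodup) →
      s ∈ M → (∀ c ∈ M, sConn g s c) →
      (∀ c ∈ M, (c.2, c.1) ∉ q → ∀ d, sAdj g c d → d ∈ S ∪ M) →
      size = (M.filter (fun c => (c.2, c.1) ∉ q)).card →
      touch = @decide (∃ c ∈ M, (c.2, c.1) ∉ q ∧ sBorder g c = true) (Classical.propDecidable _) →
      (sComp g s).card + q.length ≤ M.card + fuel →
      pvBfs g (sH g) (sW g) fuel q (S ∪ M) size touch
        = (S ∪ sComp g s, (sComp g s).card, sEdgeB g s) := by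
  intro fuel
  induction fuel with
  | zero =>
      intro q M size touch hqM hq hsM hM hcl hsize htouch hfuel
      have hMsub : M ⊆ sComp g s := fun c hc => (mem_sComp g hs).mpr (hM c hc)
      have hMcard : M.card ≤ (sComp g s).card := Finset.card_le_card hMsub
      have hq0 : q = [] := List.length_eq_zero_iff.mp (by omega)
      subst hq0
      exact bfs_terminal g S s hSdisj hs M size touch hsM hM
        (fun c hc d hd => hcl c hc List.not_mem_nil d hd) hsize htouch 0
  | succ fuel ih =>
      intro q M size touch hqM hq hsM hM hcl hsize htouch hfuel
      match q with
      | [] =>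
          exact bfs_terminal g S s hSdisj hs M size touch hsM hM
            (fun c hc d hd => hcl c hc List.not_mem_nil d hd) hsize htouch (fuel + 1)
      | (x, y) :: q' =>
          have hcM : (y, x) ∈ M := hqM (x, y) List.mem_cons_self
          have hcw : sWater g (y, x) = true := sConn_water g (hM _ hcM) hs
          have hy := (sWater_bounds g hcw).1
          have hx := (sWater_bounds g hcw).2
          have hxq' : (x, y) ∉ q' := by
            have := hq
            simp only [List.map_cons, List.nodup_cons, List.mem_map] at this
            intro hmem
            exact this.1 ⟨(x, y), hmem, rfl⟩
          show pvBfs g (sH g) (sW g) (fuel + 1) ((x, y) :: q') (S ∪ M) size touch = _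
          rw [pvBfs]
          rw [fold4_eq g hy hx q' (S ∪ M)]
          set N := newOf g (S ∪ M) y x with hN
          have hNel : ∀ n ∈ N, sWater g n = true ∧ n ∉ S ∪ M ∧ sAdj g (y, x) n :=
            fun n hn => mem_newOf_elim g hcw hn
          have hNnodup : N.Nodup := newOf_nodup g (S ∪ M) y x
          have hNM : ∀ n ∈ N, n ∉ M := by
            intro n hn hnM
            exact (hNel n hn).2.1 (Finset.mem_union_right _ hnM)
          -- the new state
          set M' := M ∪ N.toFinset with hM'
          have hseen' : S ∪ M ∪ N.toFinset = S ∪ M' := by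
            rw [hM', Finset.union_assoc]
          have hdisjMN : Disjoint M N.toFinset := by
            rw [Finset.disjoint_right]
            intro n hn
            exact hNM n (List.mem_toFinset.mp hn)
          have hM'card : M'.card = M.card + N.length := by
            rw [hM', Finset.card_union_of_disjoint hdisjMN, List.toFinset_card_of_nodup hNnodup]
          -- swapped-queue membership helpers
          have hswapinj : ∀ (e : Nat × Nat), ((e.2, e.1) = (x, y)) ↔ e = (y, x) := by
            intro e
            constructor
            · intro h
              have h1 : e.2 = x := congrArg Prod.fst h
              have h2 : e.1 = y := congrArg Prod.snd h
              exact Prod.ext h2 h1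
            · intro h; subst h; rfl
          have hmemNmap : ∀ (e : Nat × Nat), (e.2, e.1) ∈ N.map (fun c => (c.2, c.1)) ↔ e ∈ N := by
            intro e
            simp only [List.mem_map, Prod.mk.injEq]
            constructor
            · rintro ⟨a, ha, h1, h2⟩
              have : a = e := Prod.ext h2 h1
              rwa [this] at ha
            · intro he; exact ⟨e, he, rfl, rfl⟩
          -- the key filter identity
          have hfilt : M'.filter (fun e => (e.2, e.1) ∉ q' ++ N.map (fun c => (c.2, c.1)))
              = insert (y, x) (M.filter (fun e => (e.2, e.1) ∉ (x, y) :: q')) := by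
            apply Finset.ext
            intro e
            simp only [Finset.mem_filter, Finset.mem_insert, List.mem_append, List.mem_cons,
              hM', Finset.mem_union, List.mem_toFinset]
            constructor
            · rintro ⟨he | he, hnq⟩
              · by_cases hec : e = (y, x)
                · exact Or.inl hec
                · refine Or.inr ⟨he, ?_⟩
                  intro hmem
                  rcases hmem with h1 | h1
                  · exact hec ((hswapinj e).mp h1)
                  · exact hnq (Or.inl h1)
              · exfalso
                exact hnq (Or.inr ((hmemNmap e).mpr he))
            · rintro (he | ⟨he, hnq⟩)
              · subst he
                refine ⟨Or.inl hcM, ?_⟩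
                intro hmem
                rcases hmem with h1 | h1
                · exact hxq' h1
                · have : (y, x) ∈ N := (hmemNmap (y, x)).mp h1
                  exact hNM _ this hcM
              · refine ⟨Or.inl he, ?_⟩
                intro hmem
                rcases hmem with h1 | h1
                · exact hnq (Or.inr h1)
                · exact hNM e ((hmemNmap e).mp h1) he
          have hcnotin : (y, x) ∉ M.filter (fun e => (e.2, e.1) ∉ (x, y) :: q') := by
            simp only [Finset.mem_filter]
            rintro ⟨-, hno⟩
            exact hno List.mem_cons_self
          -- apply the induction hypothesis
          have := ih (q' ++ N.map (fun c => (c.2, c.1))) M' (size + 1)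
            (touch || (x == 0 || y == 0 || x == sW g - 1 || y == sH g - 1))
            ?_ ?_ ?_ ?_ ?_ ?_ ?_ ?_
          · rw [hseen']
            exact this
          -- (1) queue members are in M'
          · intro p hp
            rcases List.mem_append.mp hp with h1 | h1
            · exact Finset.mem_union_left _ (hqM p (List.mem_cons_of_mem _ h1))
            · obtain ⟨a, ha, rfl⟩ := List.mem_map.mp h1
              exact Finset.mem_union_right _ (List.mem_toFinset.mpr ha)
          -- (2) swapped queue nodup
          · rw [List.map_append]
            have hNN : (N.map (fun c : Nat × Nat => (c.2, c.1))).map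
                (fun p : Nat × Nat => (p.2, p.1)) = N := by
              rw [List.map_map]
              have hid : ((fun p : Nat × Nat => (p.2, p.1)) ∘ fun c : Nat × Nat => (c.2, c.1)) = id := by
                funext p; rfl
              rw [hid, List.map_id]
            rw [hNN]
            have h1 : (q'.map (fun p => (p.2, p.1))).Nodup := by
              have := hq
              simp only [List.map_cons, List.nodup_cons] at this
              exact this.2
            rw [List.nodup_append]
            refine ⟨h1, hNnodup, ?_⟩
            intro a ha b hb heq
            subst heq
            obtain ⟨e, he, heq2⟩ := List.mem_map.mp ha
            rw [← heq2] at hb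
            exact hNM _ hb (hqM e (List.mem_cons_of_mem _ he))
          -- (3) s ∈ M'
          · exact Finset.mem_union_left _ hsM
          -- (4) everything in M' is connected to s
          · intro c hc
            rcases Finset.mem_union.mp hc with h1 | h1
            · exact hM c h1
            · have hn := List.mem_toFinset.mp h1
              exact Relation.ReflTransGen.tail (hM _ hcM) (hNel _ hn).2.2
          -- (5) closure
          · intro e he hnq d hd
            rcases Finset.mem_union.mp he with h1 | h1
            · by_cases hec : e = (y, x)
              · subst hec
                by_cases hdm : d ∈ S ∪ M
                · rcases Finset.mem_union.mp hdm with h2 | h2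
                  · exact Finset.mem_union_left _ h2
                  · exact Finset.mem_union_right _ (Finset.mem_union_left _ h2)
                · have : d ∈ N := mem_newOf_intro g hd hdm
                  exact Finset.mem_union_right _
                    (Finset.mem_union_right _ (List.mem_toFinset.mpr this))
              · have hnq' : (e.2, e.1) ∉ (x, y) :: q' := by
                  intro hmem
                  rw [List.mem_cons] at hmem
                  rcases hmem with h2 | h2
                  · exact hec ((hswapinj e).mp h2)
                  · exact hnq (List.mem_append.mpr (Or.inl h2))
                have := hcl e h1 hnq' d hd
                rcases Finset.mem_union.mp this with h2 | h2
                · exact Finset.mem_union_left _ h2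
                · exact Finset.mem_union_right _ (Finset.mem_union_left _ h2)
            · exfalso
              have hn := List.mem_toFinset.mp h1
              exact hnq (List.mem_append.mpr (Or.inr ((hmemNmap e).mpr hn)))
          -- (6) size
          · rw [hfilt, Finset.card_insert_of_notMem hcnotin, ← hsize]
          -- (7) touch
          · rw [htouch]
            have hbord : (x == 0 || y == 0 || x == sW g - 1 || y == sH g - 1)
                = sBorder g (y, x) := rfl
            rw [hbord]
            have hiff : ((∃ c ∈ M, ((c.2, c.1) ∉ (x, y) :: q') ∧ sBorder g c = true) ∨
                sBorder g (y, x) = true)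
                ↔ (∃ c ∈ M', ((c.2, c.1) ∉ q' ++ N.map (fun c => (c.2, c.1))) ∧ sBorder g c = true) := by
              constructor
              · rintro (⟨e, he, hnq, hb⟩ | hb)
                · have : e ∈ M'.filter (fun e => (e.2, e.1) ∉ q' ++ N.map (fun c => (c.2, c.1))) := by
                    rw [hfilt]
                    exact Finset.mem_insert_of_mem (Finset.mem_filter.mpr ⟨he, hnq⟩)
                  have h2 := Finset.mem_filter.mp this
                  exact ⟨e, h2.1, h2.2, hb⟩
                · have : (y, x) ∈ M'.filter (fun e => (e.2, e.1) ∉ q' ++ N.map (fun c => (c.2, c.1))) := by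
                    rw [hfilt]
                    exact Finset.mem_insert_self _ _
                  have h2 := Finset.mem_filter.mp this
                  exact ⟨(y, x), h2.1, h2.2, hb⟩
              · rintro ⟨e, he, hnq, hb⟩
                have : e ∈ M'.filter (fun e => (e.2, e.1) ∉ q' ++ N.map (fun c => (c.2, c.1))) :=
                  Finset.mem_filter.mpr ⟨he, hnq⟩
                rw [hfilt] at this
                rcases Finset.mem_insert.mp this with h2 | h2
                · subst h2; exact Or.inr hb
                · have h3 := Finset.mem_filter.mp h2
                  exact Or.inl ⟨e, h3.1, h3.2, hb⟩
            exact bool_or_decide _ _ _ _ _ hiff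
          -- (8) fuel
          · have hlen : (q' ++ N.map (fun c => (c.2, c.1))).length = q'.length + N.length := by
              simp
            rw [hlen, hM'card]
            have := hfuel
            simp only [List.length_cons] at this
            omega


-- ---- outer seed loop (port A) ----
noncomputable def seenAt (g : List (List Bool)) (k : Nat) : Finset (Nat × Nat) :=
  @Finset.filter _ (fun c => sWater g c = true ∧ ∃ d, sConn g c d ∧ sOrd g d < k)
    (fun _ => Classical.propDecidable _) (Finset.range (sH g) ×ˢ Finset.range (sW g))

noncomputable def aggAt (g : List (List Bool)) (k : Nat) : Nat × Nat × Nat :=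
  ((sRepsIdx g k).map (fun j => ((sComp g (cellOf g j)).card, sEdgeB g (cellOf g j)))).foldl
    (sAggStep (sMinLake g)) (0, 0, 0)

theorem mem_seenAt (g : List (List Bool)) (k : Nat) (c : Nat × Nat) :
    c ∈ seenAt g k ↔ sWater g c = true ∧ ∃ d, sConn g c d ∧ sOrd g d < k := by
  simp only [seenAt, Finset.mem_filter, Finset.mem_product, Finset.mem_range]
  constructor
  · exact fun h => h.2
  · intro h
    have := sWater_bounds g h.1
    exact ⟨⟨this.1, this.2⟩, h⟩

theorem seenAt_zero (g : List (List Bool)) : seenAt g 0 = ∅ := by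
  apply Finset.ext
  intro c
  simp only [Finset.notMem_empty, iff_false, mem_seenAt]
  rintro ⟨hw, d, hc, hlt⟩
  omega

theorem seenAt_water (g : List (List Bool)) (k : Nat) :
    ∀ c ∈ seenAt g k, sWater g c = true := by
  intro c hc
  exact ((mem_seenAt g k c).mp hc).1

theorem seenAt_closed (g : List (List Bool)) (k : Nat) :
    ∀ c ∈ seenAt g k, ∀ d, sAdj g c d → d ∈ seenAt g k := by
  intro c hc d hadj
  obtain ⟨hwc, e, hce, hlt⟩ := (mem_seenAt g k c).mp hc
  refine (mem_seenAt g k d).mpr ⟨hadj.2.1, e, ?_, hlt⟩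
  exact Relation.ReflTransGen.trans (Relation.ReflTransGen.single (sAdj_symm g hadj)) hce

theorem d_eq_cellOf (g : List (List Bool)) {k : Nat} {d : Nat × Nat}
    (hwd : sWater g d = true) (hordd : sOrd g d = k) : d = cellOf g k := by
  have hb := sWater_bounds g hwd
  rw [← hordd, cellOf_sOrd g hb.2]

theorem seenAt_succ_stay (g : List (List Bool)) {k : Nat}
    (h : ¬(pvWat g (cellOf g k).1 (cellOf g k).2 = true ∧ cellOf g k ∉ seenAt g k)) :
    seenAt g (k + 1) = seenAt g k := by
  push_neg at h
  apply Finset.ext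
  intro c
  rw [mem_seenAt, mem_seenAt]
  constructor
  · rintro ⟨hwc, d, hcd, hlt⟩
    refine ⟨hwc, ?_⟩
    by_cases hdk : sOrd g d < k
    · exact ⟨d, hcd, hdk⟩
    · have hordd : sOrd g d = k := by omega
      have hwd : sWater g d = true := sConn_water g hcd hwc
      have hdc : d = cellOf g k := d_eq_cellOf g hwd hordd
      have hpw : pvWat g (cellOf g k).1 (cellOf g k).2 = true := by
        rw [← hdc]
        simp only [sWater, Bool.and_eq_true] at hwd
        exact hwd.2
      have hmem := h hpw
      obtain ⟨-, e, hke, hlte⟩ := (mem_seenAt g k (cellOf g k)).mp hmem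
      exact ⟨e, Relation.ReflTransGen.trans (hdc ▸ hcd) hke, hlte⟩
  · rintro ⟨hwc, d, hcd, hlt⟩
    exact ⟨hwc, d, hcd, by omega⟩

theorem seenAt_succ_seed (g : List (List Bool)) {k : Nat} (hk : k < sN g)
    (hw : pvWat g (cellOf g k).1 (cellOf g k).2 = true)
    (hns : cellOf g k ∉ seenAt g k) :
    sWater g (cellOf g k) = true ∧ sRep g (cellOf g k)
      ∧ (∀ e ∈ seenAt g k, ¬ sConn g (cellOf g k) e)
      ∧ seenAt g k ∪ sComp g (cellOf g k) = seenAt g (k + 1) := by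
  have hb := cellOf_bounds g hk
  have hwc : sWater g (cellOf g k) = true := by
    simp only [sWater, Bool.and_eq_true, decide_eq_true_eq]
    exact ⟨⟨hb.1, hb.2⟩, hw⟩
  have hdisj : ∀ e ∈ seenAt g k, ¬ sConn g (cellOf g k) e := by
    intro e he hconn
    obtain ⟨hwe, d, hed, hlt⟩ := (mem_seenAt g k e).mp he
    exact hns ((mem_seenAt g k _).mpr ⟨hwc, d, Relation.ReflTransGen.trans hconn hed, hlt⟩)
  have hrep : sRep g (cellOf g k) := by
    refine ⟨hwc, ?_⟩
    intro d hconn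
    by_contra hcon
    push_neg at hcon
    rw [sOrd_cellOf g hk] at hcon
    exact hns ((mem_seenAt g k _).mpr ⟨hwc, d, hconn, hcon⟩)
  refine ⟨hwc, hrep, hdisj, ?_⟩
  apply Finset.ext
  intro e
  rw [Finset.mem_union, mem_seenAt, mem_seenAt]
  constructor
  · rintro (⟨hwe, d, hed, hlt⟩ | hcomp)
    · exact ⟨hwe, d, hed, by omega⟩
    · have hconn : sConn g (cellOf g k) e := (mem_sComp g hwc).mp hcomp
      have hwe : sWater g e = true := sConn_water g hconn hwc
      exact ⟨hwe, cellOf g k, sConn_symm g hconn, by rw [sOrd_cellOf g hk]; omega⟩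
  · rintro ⟨hwe, d, hed, hlt⟩
    by_cases hdk : sOrd g d < k
    · exact Or.inl ⟨hwe, d, hed, hdk⟩
    · have hordd : sOrd g d = k := by omega
      have hwd : sWater g d = true := sConn_water g hed hwe
      have hdc : d = cellOf g k := d_eq_cellOf g hwd hordd
      refine Or.inr ((mem_sComp g hwc).mpr ?_)
      exact sConn_symm g (hdc ▸ hed)

theorem outerA (g : List (List Bool)) : ∀ k, k ≤ sN g →
    (List.range k).foldl
        (fun st j => pvSeedStep g (sH g) (sW g) (sMinLake g) st (j / sW g) (j % sW g))
        ((∅ : Finset (Nat × Nat)), 0, 0, 0)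
      = (seenAt g k, aggAt g k) := by
  intro k
  induction k with
  | zero =>
      intro _
      rw [seenAt_zero]
      rfl
  | succ k ih =>
      intro hk1
      have hk : k < sN g := by omega
      rw [foldl_range_succ, ih (by omega)]
      by_cases hcond : pvWat g (k / sW g) (k % sW g) = true ∧ (k / sW g, k % sW g) ∉ seenAt g k
      · -- new seed: a representative
        have hcond' : pvWat g (cellOf g k).1 (cellOf g k).2 = true ∧ cellOf g k ∉ seenAt g k :=
          hcond
        obtain ⟨hwc, hrep, hdisj, hseeneq⟩ := seenAt_succ_seed g hk hcond'.1 hcond'.2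
        -- run the BFS
        have hbfs := bfs_correct g (seenAt g k) (cellOf g k)
          (seenAt_water g k) (seenAt_closed g k) hdisj hwc
          (sN g + 1) [((cellOf g k).2, (cellOf g k).1)] {cellOf g k} 0 false
          (by
            intro p hp
            rw [List.mem_singleton] at hp
            subst hp
            exact Finset.mem_singleton_self _)
          (by simp)
          (Finset.mem_singleton_self _)
          (by
            intro c hc
            rw [Finset.mem_singleton] at hc
            subst hc
            exact Relation.ReflTransGen.refl)
          (by
            intro c hc hnq d hd
            rw [Finset.mem_singleton] at hc
            subst hc
            exact absurd List.mem_cons_self hnq)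
          (by
            rw [Finset.filter_singleton]
            rw [if_neg (by
              intro hno
              exact hno List.mem_cons_self)]
            rfl)
          (by
            have : ¬ (∃ c ∈ ({cellOf g k} : Finset (Nat × Nat)),
                ((c.2, c.1) ∉ [((cellOf g k).2, (cellOf g k).1)]) ∧ sBorder g c = true) := by
              rintro ⟨c, hc, hnq, -⟩
              rw [Finset.mem_singleton] at hc
              subst hc
              exact hnq List.mem_cons_self
            have hf : @decide (∃ c ∈ ({cellOf g k} : Finset (Nat × Nat)),
                ((c.2, c.1) ∉ [((cellOf g k).2, (cellOf g k).1)]) ∧ sBorder g c = true)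
                (Classical.propDecidable _) = false := by
              rw [decide_eq_false_iff_not]
              exact this
            exact hf.symm)
          (by
            have hcard : (sComp g (cellOf g k)).card ≤ sN g := by
              have hsub : sComp g (cellOf g k) ⊆ Finset.range (sH g) ×ˢ Finset.range (sW g) := by
                intro z hz
                rw [sComp] at hz
                exact @Finset.mem_of_mem_filter _ (fun d => sConn g (cellOf g k) d)
                  (fun _ => Classical.propDecidable _) _ z hz
              have := Finset.card_le_card hsub
              rwa [Finset.card_product, Finset.card_range, Finset.card_range] at this
            simp only [List.length_cons, List.length_nil, Finset.card_singleton]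
            omega)
        have hseenarg : seenAt g k ∪ {cellOf g k} = insert (cellOf g k) (seenAt g k) := by
          rw [Finset.insert_eq, Finset.union_comm]
        rw [hseenarg] at hbfs
        -- fold the port's step
        show pvSeedStep g (sH g) (sW g) (sMinLake g) (seenAt g k, aggAt g k) (k / sW g) (k % sW g)
          = (seenAt g (k + 1), aggAt g (k + 1))
        rw [pvSeedStep, if_pos hcond]
        have hbfs' : pvBfs g (sH g) (sW g) (sH g * sW g + 1)
            [(k % sW g, k / sW g)] (insert (k / sW g, k % sW g) (seenAt g k)) 0 false
            = (seenAt g k ∪ sComp g (cellOf g k), (sComp g (cellOf g k)).card,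
               sEdgeB g (cellOf g k)) := hbfs
        rw [hbfs']
        have haggeq : aggAt g (k + 1)
            = sAggStep (sMinLake g) (aggAt g k)
                ((sComp g (cellOf g k)).card, sEdgeB g (cellOf g k)) := by
          rw [aggAt, aggAt, sRepsIdx_succ, if_pos ((sRepB_iff g _).mpr hrep), List.map_append,
            List.foldl_append]
          rfl
        rw [hseeneq, haggeq, sAggStep]
        by_cases hE : sEdgeB g (cellOf g k) = true
        · rw [if_pos hE, if_pos hE]
        · rw [if_neg hE, if_neg hE]
          by_cases hL : (sComp g (cellOf g k)).card ≥ sMinLake g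
          · rw [if_pos hL, if_pos hL]
          · rw [if_neg hL, if_neg hL]
      · -- not water, or already seen: nothing changes
        have hstay := seenAt_succ_stay g (k := k) hcond
        have hnorep : sRepB g (cellOf g k) = false := by
          rw [Bool.eq_false_iff]
          intro hr
          have hrep := (sRepB_iff g _).mp hr
          push_neg at hcond
          have hw : pvWat g (cellOf g k).1 (cellOf g k).2 = true := by
            have := hrep.1
            simp only [sWater, Bool.and_eq_true] at this
            exact this.2
          have hmem := hcond hw
          obtain ⟨-, d, hkd, hlt⟩ := (mem_seenAt g k (cellOf g k)).mp hmem
          have := hrep.2 d hkd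
          rw [sOrd_cellOf g hk] at this
          omega
        show pvSeedStep g (sH g) (sW g) (sMinLake g) (seenAt g k, aggAt g k) (k / sW g) (k % sW g)
          = (seenAt g (k + 1), aggAt g (k + 1))
        rw [pvSeedStep, if_neg hcond, hstay]
        have : aggAt g (k + 1) = aggAt g k := by
          rw [aggAt, aggAt, sRepsIdx_succ, hnorep]
          simp
        rw [this]

-- port A computes the canonical aggregation
theorem portA_eq (g : List (List Bool)) :
    water_components_py g
      = (((sTarget g).1 : Int), ((sTarget g).2.1 : Int), ((sTarget g).2.2 : Int)) := by
  simp only [water_components_py]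
  rw [pvW_eq, nested_eq_single]
  have h1 : (List.range (g.length * sW g)).foldl
      (fun st k => pvSeedStep g g.length (sW g) (max 16 (sW g * g.length / 2000)) st
        (k / sW g) (k % sW g)) ((∅ : Finset (Nat × Nat)), 0, 0, 0)
      = (seenAt g (sN g), aggAt g (sN g)) := outerA g (sN g) le_rfl
  rw [h1]
  rfl

-- ---- union-find (port B) : abstract root function ----
def rootP (p : PySem.Dict (Nat × Nat) (Nat × Nat)) : Nat → (Nat × Nat) → (Nat × Nat)
  | 0, c => c
  | f + 1, c =>
      match p.get? c with
      | none => c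
      | some v => if v = c then c else rootP p f v

def sRoot (g : List (List Bool)) (p : PySem.Dict (Nat × Nat) (Nat × Nat)) (c : Nat × Nat) :
    Nat × Nat := rootP p (sOrd g c + 1) c

def WFp (g : List (List Bool)) (p : PySem.Dict (Nat × Nat) (Nat × Nat)) : Prop :=
  (∀ c, p.contains c = true ↔ sWater g c = true) ∧
  (∀ c v, p.get? c = some v → sOrd g v ≤ sOrd g c ∧ p.contains v = true)

def isRootp (p : PySem.Dict (Nat × Nat) (Nat × Nat)) (r : Nat × Nat) : Prop :=
  p.get? r = none ∨ p.get? r = some r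

theorem water_of_key (g : List (List Bool)) {p : PySem.Dict (Nat × Nat) (Nat × Nat)}
    (hWF : WFp g p) {c v : Nat × Nat} (h : p.get? c = some v) :
    sWater g c = true ∧ sWater g v = true := by
  have hc : p.contains c = true := by
    rw [PySem.Dict.contains_eq_isSome_get?, h]
    rfl
  exact ⟨(hWF.1 c).mp hc, (hWF.1 v).mp (hWF.2 c v h).2⟩

theorem step_ord_lt (g : List (List Bool)) {p : PySem.Dict (Nat × Nat) (Nat × Nat)}
    (hWF : WFp g p) {c v : Nat × Nat} (h : p.get? c = some v) (hne : v ≠ c) :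
    sOrd g v < sOrd g c := by
  have hle := (hWF.2 c v h).1
  rcases Nat.lt_or_ge (sOrd g v) (sOrd g c) with h1 | h1
  · exact h1
  · exfalso
    have heq : sOrd g v = sOrd g c := by omega
    have hw := water_of_key g hWF h
    exact hne (sOrd_inj g (sWater_bounds g hw.2).2 (sWater_bounds g hw.1).2 heq)

theorem rootP_congr (g : List (List Bool)) {p : PySem.Dict (Nat × Nat) (Nat × Nat)}
    (hWF : WFp g p) : ∀ (f1 : Nat) (f2 : Nat) (c : Nat × Nat),
    sOrd g c < f1 → sOrd g c < f2 → rootP p f1 c = rootP p f2 c := by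
  intro f1
  induction f1 with
  | zero => intro f2 c h1 _; omega
  | succ f1 ih =>
      intro f2 c h1 h2
      match f2 with
      | 0 => omega
      | f2 + 1 =>
          show rootP p (f1 + 1) c = rootP p (f2 + 1) c
          rw [rootP, rootP]
          cases hget : p.get? c with
          | none => rfl
          | some v =>
              by_cases hvc : v = c
              · simp [hvc]
              · simp only [if_neg hvc]
                have hlt := step_ord_lt g hWF hget hvc
                exact ih f2 v (by omega) (by omega)

theorem sRoot_none (g : List (List Bool)) (p : PySem.Dict (Nat × Nat) (Nat × Nat))
    {c : Nat × Nat} (h : p.get? c = none) : sRoot g p c = c := by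
  rw [sRoot, rootP, h]

theorem sRoot_self (g : List (List Bool)) (p : PySem.Dict (Nat × Nat) (Nat × Nat))
    {c : Nat × Nat} (h : p.get? c = some c) : sRoot g p c = c := by
  rw [sRoot, rootP, h]
  simp

theorem sRoot_step (g : List (List Bool)) {p : PySem.Dict (Nat × Nat) (Nat × Nat)}
    (hWF : WFp g p) {c v : Nat × Nat} (h : p.get? c = some v) (hne : v ≠ c) :
    sRoot g p c = sRoot g p v := by
  have hlt := step_ord_lt g hWF h hne
  rw [sRoot]
  have h1 : rootP p (sOrd g c + 1) c = rootP p (sOrd g c) v := by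
    rw [rootP, h]
    simp [hne]
  rw [h1, sRoot]
  exact rootP_congr g hWF _ _ v (by omega) (by omega)

theorem sRoot_isRoot (g : List (List Bool)) {p : PySem.Dict (Nat × Nat) (Nat × Nat)}
    (hWF : WFp g p) (c : Nat × Nat) : isRootp p (sRoot g p c) := by
  suffices h : ∀ n c, sOrd g c = n → isRootp p (sRoot g p c) by
    exact h _ c rfl
  intro n
  induction n using Nat.strong_induction_on with
  | _ n ih =>
      intro c hn
      cases hget : p.get? c with
      | none => rw [sRoot_none g p hget]; exact Or.inl hget
      | some v =>
          by_cases hvc : v = c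
          · rw [hvc] at hget
            rw [sRoot_self g p hget]
            exact Or.inr hget
          · rw [sRoot_step g hWF hget hvc]
            have hlt := step_ord_lt g hWF hget hvc
            exact ih (sOrd g v) (by omega) v rfl

theorem sRoot_of_isRoot (g : List (List Bool)) (p : PySem.Dict (Nat × Nat) (Nat × Nat))
    {r : Nat × Nat} (h : isRootp p r) : sRoot g p r = r := by
  rcases h with h | h
  · exact sRoot_none g p h
  · exact sRoot_self g p h

theorem ord_sRoot_le (g : List (List Bool)) {p : PySem.Dict (Nat × Nat) (Nat × Nat)}
    (hWF : WFp g p) (c : Nat × Nat) : sOrd g (sRoot g p c) ≤ sOrd g c := by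
  suffices h : ∀ n c, sOrd g c = n → sOrd g (sRoot g p c) ≤ sOrd g c by
    exact h _ c rfl
  intro n
  induction n using Nat.strong_induction_on with
  | _ n ih =>
      intro c hn
      cases hget : p.get? c with
      | none => rw [sRoot_none g p hget]
      | some v =>
          by_cases hvc : v = c
          · rw [hvc] at hget; rw [sRoot_self g p hget]
          · rw [sRoot_step g hWF hget hvc]
            have hlt := step_ord_lt g hWF hget hvc
            have := ih (sOrd g v) (by omega) v rfl
            omega

theorem contains_sRoot (g : List (List Bool)) {p : PySem.Dict (Nat × Nat) (Nat × Nat)}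
    (hWF : WFp g p) {c : Nat × Nat} (hc : p.contains c = true) :
    p.contains (sRoot g p c) = true := by
  suffices h : ∀ n c, sOrd g c = n → p.contains c = true → p.contains (sRoot g p c) = true by
    exact h _ c rfl hc
  intro n
  induction n using Nat.strong_induction_on with
  | _ n ih =>
      intro c hn hcc
      cases hget : p.get? c with
      | none => rw [sRoot_none g p hget]; exact hcc
      | some v =>
          by_cases hvc : v = c
          · rw [hvc] at hget; rw [sRoot_self g p hget]; exact hcc
          · rw [sRoot_step g hWF hget hvc]
            have hlt := step_ord_lt g hWF hget hvc
            exact ih (sOrd g v) (by omega) v rfl (hWF.2 c v hget).2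

theorem R_sRoot (g : List (List Bool)) {p : PySem.Dict (Nat × Nat) (Nat × Nat)}
    {R : (Nat × Nat) → (Nat × Nat) → Prop}
    (hWF : WFp g p) (hI2 : ∀ c v, p.get? c = some v → R c v)
    (hRr : ∀ a, R a a) (hRt : ∀ {a b c}, R a b → R b c → R a c)
    (c : Nat × Nat) : R c (sRoot g p c) := by
  suffices h : ∀ n c, sOrd g c = n → R c (sRoot g p c) by
    exact h _ c rfl
  intro n
  induction n using Nat.strong_induction_on with
  | _ n ih =>
      intro c hn
      cases hget : p.get? c with
      | none => rw [sRoot_none g p hget]; exact hRr c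
      | some v =>
          by_cases hvc : v = c
          · rw [hvc] at hget; rw [sRoot_self g p hget]; exact hRr c
          · rw [sRoot_step g hWF hget hvc]
            have hlt := step_ord_lt g hWF hget hvc
            exact hRt (hI2 c v hget) (ih (sOrd g v) (by omega) v rfl)

-- inserting a pointer to an ancestor preserves every root (path halving)
theorem insert_ancestor_spec (g : List (List Bool)) {p : PySem.Dict (Nat × Nat) (Nat × Nat)}
    (hWF : WFp g p) {c v pp : Nat × Nat} (hget : p.get? c = some v) (hne : v ≠ c)
    (hpp : pp = v ∨ p.get? v = some pp) :
    WFp g (p.insert c pp) ∧ (∀ d, sRoot g (p.insert c pp) d = sRoot g p d) := by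
  have hcont_c : p.contains c = true := by
    rw [PySem.Dict.contains_eq_isSome_get?, hget]; rfl
  have hppfacts : sOrd g pp ≤ sOrd g v ∧ p.contains pp = true := by
    rcases hpp with h | h
    · exact ⟨by rw [h], by rw [h]; exact (hWF.2 c v hget).2⟩
    · exact (hWF.2 v pp h)
  have hWF' : WFp g (p.insert c pp) := by
    constructor
    · intro k
      rw [PySem.Dict.contains_insert]
      by_cases hk : k = c
      · rw [hk]
        simp only [BEq.rfl, Bool.true_or]
        constructor
        · intro _; exact (hWF.1 c).mp hcont_c
        · intro _; trivial
      · have : (k == c) = false := by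
          simp [hk]
        rw [this, Bool.false_or]
        exact hWF.1 k
    · intro k u hku
      rw [PySem.Dict.get?_insert] at hku
      by_cases hk : k = c
      · rw [if_pos hk] at hku
        have hu : u = pp := by
          injection hku with h'
          exact h'.symm
        rw [hu, hk]
        constructor
        · have h3 := (hWF.2 c v hget).1
          have h4 := hppfacts.1
          omega
        · rw [PySem.Dict.contains_insert]
          by_cases hpc : pp = c
          · rw [hpc]; simp
          · have hb : (pp == c) = false := by simp [hpc]
            rw [hb, Bool.false_or]
            exact hppfacts.2
      · rw [if_neg hk] at hku
        have h2 := hWF.2 k u hku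
        refine ⟨h2.1, ?_⟩
        rw [PySem.Dict.contains_insert]
        rw [h2.2, Bool.or_true]
  refine ⟨hWF', ?_⟩
  suffices hmain : ∀ n d, sOrd g d = n → sRoot g (p.insert c pp) d = sRoot g p d by
    exact fun d => hmain _ d rfl
  intro n
  induction n using Nat.strong_induction_on with
  | _ n ih =>
      intro d hn
      by_cases hdc : d = c
      · subst hdc
        have hget' : (p.insert d pp).get? d = some pp := PySem.Dict.get?_insert_self p d pp
        have hppd : pp ≠ d := by
          intro he
          have h1 := hppfacts.1
          have h2 := step_ord_lt g hWF hget hne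
          rw [he] at h1
          omega
        rw [sRoot_step g hWF' hget' hppd]
        have hppord : sOrd g pp < sOrd g d := by
          have := step_ord_lt g hWF hget hne
          have := hppfacts.1
          omega
        rw [ih (sOrd g pp) (by omega) pp rfl]
        rcases hpp with h | h
        · subst h; exact (sRoot_step g hWF hget hne).symm
        · rw [sRoot_step g hWF hget hne]
          by_cases hpv : pp = v
          · rw [hpv]
          · exact (sRoot_step g hWF h hpv).symm
      · have hget' : (p.insert c pp).get? d = p.get? d := by
          rw [PySem.Dict.get?_insert, if_neg hdc]
        cases hgd : p.get? d with
        | none =>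
            rw [sRoot_none g p hgd, sRoot_none g _ (by rw [hget', hgd])]
        | some u =>
            by_cases hud : u = d
            · subst hud
              rw [sRoot_self g p hgd, sRoot_self g _ (by rw [hget', hgd])]
            · rw [sRoot_step g hWF hgd hud,
                sRoot_step g hWF' (by rw [hget', hgd]) hud]
              have hlt := step_ord_lt g hWF hgd hud
              exact ih (sOrd g u) (by omega) u rfl

-- pvFind returns the root, preserves every root, WF and the parent relation R
theorem find_spec (g : List (List Bool)) {R : (Nat × Nat) → (Nat × Nat) → Prop}
    (hRr : ∀ a, R a a) (hRt : ∀ {a b c}, R a b → R b c → R a c) :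
    ∀ (fuel : Nat) (p : PySem.Dict (Nat × Nat) (Nat × Nat)) (c : Nat × Nat),
      WFp g p → (∀ a v, p.get? a = some v → R a v) →
      p.contains c = true → sOrd g c < fuel →
      (pvFind fuel p c).2 = sRoot g p c ∧ WFp g (pvFind fuel p c).1 ∧
        (∀ a v, (pvFind fuel p c).1.get? a = some v → R a v) ∧
        (∀ d, sRoot g (pvFind fuel p c).1 d = sRoot g p d) := by
  intro fuel
  induction fuel with
  | zero => intro p c _ _ _ h; omega
  | succ fuel ih =>
      intro p c hWF hI2 hc hfuel
      rw [pvFind]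
      cases hget : p.get? c with
      | none =>
          have hgetD : p.getD c c = c := PySem.Dict.getD_of_get?_eq_none p c hget
          rw [hgetD, if_pos rfl]
          exact ⟨(sRoot_none g p hget).symm, hWF, hI2, fun d => rfl⟩
      | some v =>
          have hgetD : p.getD c c = v := PySem.Dict.getD_of_get?_eq_some p c hget
          by_cases hvc : v = c
          · rw [hgetD, if_pos hvc]
            rw [hvc] at hget
            exact ⟨(sRoot_self g p hget).symm, hWF, hI2, fun d => rfl⟩
          · rw [hgetD, if_neg hvc]
            obtain ⟨pp, hppdef⟩ : ∃ pp, pp = p.getD v v := ⟨_, rfl⟩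
            rw [← hppdef]
            have hpp : pp = v ∨ p.get? v = some pp := by
              cases hgv : p.get? v with
              | none =>
                  exact Or.inl (by rw [hppdef]; exact PySem.Dict.getD_of_get?_eq_none p v hgv)
              | some u =>
                  right
                  rw [hppdef, PySem.Dict.getD_of_get?_eq_some p v hgv]
            obtain ⟨hWF', hroots'⟩ := insert_ancestor_spec g hWF hget hvc hpp
            have hI2' : ∀ a u, (p.insert c pp).get? a = some u → R a u := by
              intro a u hau
              rw [PySem.Dict.get?_insert] at hau
              by_cases hac : a = c
              · rw [if_pos hac] at hau
                have hu : u = pp := by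
                  injection hau with h'
                  exact h'.symm
                rw [hu, hac]
                rcases hpp with h | h
                · rw [h]; exact hI2 c v hget
                · exact hRt (hI2 c v hget) (hI2 v pp h)
              · rw [if_neg hac] at hau
                exact hI2 a u hau
            have hcont_pp : (p.insert c pp).contains pp = true := by
              have h1 : p.contains pp = true := by
                rcases hpp with h | h
                · rw [h]; exact (hWF.2 c v hget).2
                · exact (hWF.2 v pp h).2
              rw [PySem.Dict.contains_insert, h1, Bool.or_true]
            have hppord : sOrd g pp < sOrd g c := by
              have h1 := step_ord_lt g hWF hget hvc
              have h2 : sOrd g pp ≤ sOrd g v := by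
                rcases hpp with h | h
                · rw [h]
                · exact (hWF.2 v pp h).1
              omega
            have hres := ih (p.insert c pp) pp hWF' hI2' hcont_pp (by omega)
            refine ⟨?_, hres.2.1, hres.2.2.1, ?_⟩
            · rw [hres.1, hroots' pp]
              rcases hpp with h | h
              · rw [h]
                exact (sRoot_step g hWF hget hvc).symm
              · rw [sRoot_step g hWF hget hvc]
                by_cases hpv : pp = v
                · rw [hpv]
                · exact (sRoot_step g hWF h hpv).symm
            · intro d
              rw [hres.2.2.2 d, hroots' d]

-- linking one root under another substitutes that root everywhere
theorem link_spec (g : List (List Bool)) {p : PySem.Dict (Nat × Nat) (Nat × Nat)}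
    (hWF : WFp g p) {ra rb : Nat × Nat} (hra : isRootp p ra) (hrb : isRootp p rb)
    (hne : ra ≠ rb) (hcontra : p.contains ra = true) (hcontrb : p.contains rb = true)
    (hord : sOrd g rb < sOrd g ra) :
    WFp g (p.insert ra rb) ∧
      (∀ d, sRoot g (p.insert ra rb) d
        = (if sRoot g p d = ra then rb else sRoot g p d)) := by
  have hWF' : WFp g (p.insert ra rb) := by
    constructor
    · intro k
      rw [PySem.Dict.contains_insert]
      by_cases hk : k = ra
      · rw [hk]
        simp only [BEq.rfl, Bool.true_or]
        constructor
        · intro _; exact (hWF.1 ra).mp hcontra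
        · intro _; trivial
      · have : (k == ra) = false := by simp [hk]
        rw [this, Bool.false_or]
        exact hWF.1 k
    · intro k u hku
      rw [PySem.Dict.get?_insert] at hku
      by_cases hk : k = ra
      · rw [if_pos hk] at hku
        have hu : u = rb := by
          injection hku with h'
          exact h'.symm
        rw [hu, hk]
        refine ⟨by omega, ?_⟩
        rw [PySem.Dict.contains_insert, hcontrb, Bool.or_true]
      · rw [if_neg hk] at hku
        have h2 := hWF.2 k u hku
        refine ⟨h2.1, ?_⟩
        rw [PySem.Dict.contains_insert, h2.2, Bool.or_true]
  refine ⟨hWF', ?_⟩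
  suffices hmain : ∀ n d, sOrd g d = n →
      sRoot g (p.insert ra rb) d = (if sRoot g p d = ra then rb else sRoot g p d) by
    exact fun d => hmain _ d rfl
  intro n
  induction n using Nat.strong_induction_on with
  | _ n ih =>
      intro d hn
      by_cases hdra : d = ra
      · subst hdra
        have hget' : (p.insert d rb).get? d = some rb := PySem.Dict.get?_insert_self p d rb
        have hrbd : rb ≠ d := fun he => hne he.symm
        rw [sRoot_step g hWF' hget' hrbd]
        rw [ih (sOrd g rb) (by omega) rb rfl]
        rw [sRoot_of_isRoot g p hrb]
        rw [if_neg (fun he => hne he.symm), sRoot_of_isRoot g p hra, if_pos rfl]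
      · have hget' : (p.insert ra rb).get? d = p.get? d := by
          rw [PySem.Dict.get?_insert, if_neg hdra]
        cases hgd : p.get? d with
        | none =>
            rw [sRoot_none g _ (by rw [hget', hgd]), sRoot_none g p hgd, if_neg hdra]
        | some u =>
            by_cases hud : u = d
            · subst hud
              rw [sRoot_self g _ (by rw [hget', hgd]), sRoot_self g p hgd, if_neg hdra]
            · rw [sRoot_step g hWF' (by rw [hget', hgd]) hud,
                sRoot_step g hWF hgd hud]
              have hlt := step_ord_lt g hWF hgd hud
              exact ih (sOrd g u) (by omega) u rfl

theorem pvLex_iff (g : List (List Bool)) {a b : Nat × Nat}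
    (ha : sWater g a = true) (hb : sWater g b = true) :
    pvLex a b = true ↔ sOrd g a < sOrd g b := by
  have hab := sWater_bounds g ha
  have hbb := sWater_bounds g hb
  simp only [pvLex, Bool.or_eq_true, Bool.and_eq_true, decide_eq_true_eq, beq_iff_eq]
  simp only [sOrd]
  constructor
  · rintro (h | ⟨h1, h2⟩)
    · have : a.1 * sW g + sW g ≤ b.1 * sW g := by
        calc a.1 * sW g + sW g = (a.1 + 1) * sW g := by ring
        _ ≤ b.1 * sW g := Nat.mul_le_mul_right _ h
      omega
    · rw [h1]; omega
  · intro h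
    rcases Nat.lt_trichotomy a.1 b.1 with h1 | h1 | h1
    · exact Or.inl h1
    · right
      rw [h1] at h ⊢
      exact ⟨rfl, by omega⟩
    · exfalso
      have : b.1 * sW g + sW g ≤ a.1 * sW g := by
        calc b.1 * sW g + sW g = (b.1 + 1) * sW g := by ring
        _ ≤ a.1 * sW g := Nat.mul_le_mul_right _ h1
      omega

-- ---- EqvGen utilities ----
theorem eqvGen_map_eq {α β : Type} {E : α → α → Prop} {φ : α → β}
    (hrel : ∀ u v, E u v → φ u = φ v) :
    ∀ u v, Relation.EqvGen E u v → φ u = φ v := by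
  intro u v h
  induction h with
  | rel x y hxy => exact hrel x y hxy
  | refl x => rfl
  | symm x y _ ih => exact ih.symm
  | trans x y z _ _ ih1 ih2 => exact ih1.trans ih2

theorem eqvGen_iff_of_iff {α : Type} {E F : α → α → Prop}
    (h : ∀ u v, E u v ↔ F u v) :
    ∀ u v, Relation.EqvGen E u v ↔ Relation.EqvGen F u v := by
  intro u v
  constructor
  · exact Relation.EqvGen.mono (fun a b hab => (h a b).mp hab)
  · exact Relation.EqvGen.mono (fun a b hab => (h a b).mpr hab)

-- ---- union: merge two classes ----
theorem union_spec (g : List (List Bool)) {p : PySem.Dict (Nat × Nat) (Nat × Nat)}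
    {R R' : (Nat × Nat) → (Nat × Nat) → Prop}
    (hWF : WFp g p) (hI2 : ∀ c v, p.get? c = some v → R c v)
    (hI3 : ∀ c d, R c d → sRoot g p c = sRoot g p d)
    (hRr : ∀ a, R a a) (hRt : ∀ {a b c}, R a b → R b c → R a c)
    (hR'r : ∀ a, R' a a) (hR't : ∀ {a b c}, R' a b → R' b c → R' a c)
    (hR's : ∀ {a b}, R' a b → R' b a)
    (hsub : ∀ u v, R u v → R' u v) {a b : Nat × Nat} (hab : R' a b)
    (hgen : ∀ u v, R' u v →
      Relation.EqvGen (fun x y => R x y ∨ (x = a ∧ y = b)) u v)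
    (ha : sWater g a = true) (hb : sWater g b = true) :
    WFp g (pvUnion (sN g) p a b) ∧
      (∀ c v, (pvUnion (sN g) p a b).get? c = some v → R' c v) ∧
      (∀ c d, R' c d → sRoot g (pvUnion (sN g) p a b) c = sRoot g (pvUnion (sN g) p a b) d) := by
  have hca : p.contains a = true := (hWF.1 a).mpr ha
  have horda : sOrd g a < sN g := sOrd_lt_n g ha
  have hordb : sOrd g b < sN g := sOrd_lt_n g hb
  have f1 := find_spec g hRr hRt (sN g + 1) p a hWF hI2 hca (by omega)
  obtain ⟨q1, hq1⟩ : ∃ q, q = pvFind (sN g + 1) p a := ⟨_, rfl⟩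
  rw [← hq1] at f1
  have hcb : q1.1.contains b = true := (f1.2.1.1 b).mpr hb
  have f2 := find_spec g hRr hRt (sN g + 1) q1.1 b f1.2.1 f1.2.2.1 hcb (by omega)
  obtain ⟨q2, hq2⟩ : ∃ q, q = pvFind (sN g + 1) q1.1 b := ⟨_, rfl⟩
  rw [← hq2] at f2
  have hWF2 : WFp g q2.1 := f2.2.1
  have hI22 : ∀ c v, q2.1.get? c = some v → R c v := f2.2.2.1
  have hroots2 : ∀ d, sRoot g q2.1 d = sRoot g p d := by
    intro d
    rw [f2.2.2.2 d, f1.2.2.2 d]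
  have hra : q1.2 = sRoot g p a := f1.1
  have hrb : q2.2 = sRoot g p b := by
    rw [f2.1, f1.2.2.2 b]
  have hunion : pvUnion (sN g) p a b
      = (if q1.2 = q2.2 then q2.1
         else if pvLex q1.2 q2.2 = true then q2.1.insert q2.2 q1.2
         else q2.1.insert q1.2 q2.2) := by
    rw [pvUnion, ← hq1, ← hq2]
  -- roots are water
  have hwra : sWater g q1.2 = true := by
    rw [hra]
    exact (hWF.1 _).mp (contains_sRoot g hWF hca)
  have hwrb : sWater g q2.2 = true := by
    rw [hrb]
    exact (hWF.1 _).mp (contains_sRoot g hWF ((hWF.1 b).mpr hb))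
  have hcontra2 : q2.1.contains q1.2 = true := (hWF2.1 _).mpr hwra
  have hcontrb2 : q2.1.contains q2.2 = true := (hWF2.1 _).mpr hwrb
  have hisra : isRootp q2.1 q1.2 := by
    have h1 : sRoot g q2.1 a = q1.2 := by rw [hroots2 a, hra]
    rw [← h1]
    exact sRoot_isRoot g hWF2 a
  have hisrb : isRootp q2.1 q2.2 := by
    have h1 : sRoot g q2.1 b = q2.2 := by rw [hroots2 b, hrb]
    rw [← h1]
    exact sRoot_isRoot g hWF2 b
  have hRa : R' a q1.2 := by
    rw [hra]
    exact hsub _ _ (R_sRoot g hWF hI2 hRr hRt a)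
  have hRb : R' b q2.2 := by
    rw [hrb]
    exact hsub _ _ (R_sRoot g hWF hI2 hRr hRt b)
  by_cases heq : q1.2 = q2.2
  · rw [hunion, if_pos heq]
    refine ⟨hWF2, fun c v h => hsub c v (hI22 c v h), ?_⟩
    intro c d hcd
    have hbase : ∀ u v, (R u v ∨ (u = a ∧ v = b)) → sRoot g q2.1 u = sRoot g q2.1 v := by
      rintro u v (h | ⟨h1, h2⟩)
      · rw [hroots2, hroots2]
        exact hI3 u v h
      · rw [h1, h2, hroots2, hroots2, ← hra, ← hrb, heq]
    exact eqvGen_map_eq hbase c d (hgen c d hcd)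
  · have hordne : sOrd g q1.2 ≠ sOrd g q2.2 := by
      intro h
      exact heq (sOrd_inj g (sWater_bounds g hwra).2 (sWater_bounds g hwrb).2 h)
    -- R' relates the two roots
    have hR'rarb : R' q1.2 q2.2 := hR't (hR't (hR's hRa) hab) hRb
    by_cases hlex : pvLex q1.2 q2.2 = true
    · -- ord ra < ord rb, link rb -> ra
      have hordlt : sOrd g q1.2 < sOrd g q2.2 := (pvLex_iff g hwra hwrb).mp hlex
      obtain ⟨hWF3, hmap⟩ := link_spec g hWF2 hisrb hisra (fun h => heq h.symm)
        hcontrb2 hcontra2 hordlt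
      rw [hunion, if_neg heq, if_pos hlex]
      refine ⟨hWF3, ?_, ?_⟩
      · intro c v hcv
        rw [PySem.Dict.get?_insert] at hcv
        by_cases hc : c = q2.2
        · rw [if_pos hc] at hcv
          have hv : v = q1.2 := by injection hcv with h'; exact h'.symm
          rw [hv, hc]
          exact hR's hR'rarb
        · rw [if_neg hc] at hcv
          exact hsub c v (hI22 c v hcv)
      · intro c d hcd
        have hbase : ∀ u v, (R u v ∨ (u = a ∧ v = b)) →
            sRoot g (q2.1.insert q2.2 q1.2) u = sRoot g (q2.1.insert q2.2 q1.2) v := by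
          rintro u v (h | ⟨h1, h2⟩)
          · rw [hmap u, hmap v]
            have : sRoot g q2.1 u = sRoot g q2.1 v := by
              rw [hroots2, hroots2]; exact hI3 u v h
            rw [this]
          · rw [h1, h2, hmap a, hmap b]
            have h3 : sRoot g q2.1 a = q1.2 := by rw [hroots2 a, hra]
            have h4 : sRoot g q2.1 b = q2.2 := by rw [hroots2 b, hrb]
            rw [h3, h4, if_neg heq, if_pos rfl]
        exact eqvGen_map_eq hbase c d (hgen c d hcd)
    · -- ord rb < ord ra, link ra -> rb
      have hordlt : sOrd g q2.2 < sOrd g q1.2 := by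
        have h1 : ¬ sOrd g q1.2 < sOrd g q2.2 := fun h => hlex ((pvLex_iff g hwra hwrb).mpr h)
        omega
      obtain ⟨hWF3, hmap⟩ := link_spec g hWF2 hisra hisrb heq hcontra2 hcontrb2 hordlt
      rw [hunion, if_neg heq, if_neg hlex]
      refine ⟨hWF3, ?_, ?_⟩
      · intro c v hcv
        rw [PySem.Dict.get?_insert] at hcv
        by_cases hc : c = q1.2
        · rw [if_pos hc] at hcv
          have hv : v = q2.2 := by injection hcv with h'; exact h'.symm
          rw [hv, hc]
          exact hR'rarb
        · rw [if_neg hc] at hcv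
          exact hsub c v (hI22 c v hcv)
      · intro c d hcd
        have hbase : ∀ u v, (R u v ∨ (u = a ∧ v = b)) →
            sRoot g (q2.1.insert q1.2 q2.2) u = sRoot g (q2.1.insert q1.2 q2.2) v := by
          rintro u v (h | ⟨h1, h2⟩)
          · rw [hmap u, hmap v]
            have : sRoot g q2.1 u = sRoot g q2.1 v := by
              rw [hroots2, hroots2]; exact hI3 u v h
            rw [this]
          · rw [h1, h2, hmap a, hmap b]
            have h3 : sRoot g q2.1 a = q1.2 := by rw [hroots2 a, hra]
            have h4 : sRoot g q2.1 b = q2.2 := by rw [hroots2 b, hrb]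
            rw [h3, h4, if_pos rfl, if_neg (fun h => heq h.symm)]
        exact eqvGen_map_eq hbase c d (hgen c d hcd)

-- ---- the union pass ----
def rightC (c : Nat × Nat) : Nat × Nat := (c.1, c.2 + 1)
def downC (c : Nat × Nat) : Nat × Nat := (c.1 + 1, c.2)

def eRel (g : List (List Bool)) (k : Nat) (u v : Nat × Nat) : Prop :=
  sWater g u = true ∧ sWater g v = true ∧ sOrd g u < k ∧ (v = rightC u ∨ v = downC u)

def Rk (g : List (List Bool)) (k : Nat) : (Nat × Nat) → (Nat × Nat) → Prop :=
  Relation.EqvGen (eRel g k)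

theorem Rk_refl (g : List (List Bool)) (k : Nat) (a : Nat × Nat) : Rk g k a a :=
  Relation.EqvGen.refl a
theorem Rk_trans (g : List (List Bool)) (k : Nat) {a b c : Nat × Nat}
    (h1 : Rk g k a b) (h2 : Rk g k b c) : Rk g k a c :=
  Relation.EqvGen.trans _ _ _ h1 h2
def parent0 (g : List (List Bool)) : PySem.Dict (Nat × Nat) (Nat × Nat) :=
  (List.range (sN g)).foldl (fun d j =>
    if pvWat g (j / sW g) (j % sW g) = true
    then d.insert (j / sW g, j % sW g) (j / sW g, j % sW g) else d) PySem.Dict.empty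

def passUpTo (g : List (List Bool)) (k : Nat) : PySem.Dict (Nat × Nat) (Nat × Nat) :=
  (List.range k).foldl (fun d j =>
    pvUnionStep g (sH g) (sW g) (sH g * sW g) d (j / sW g) (j % sW g)) (parent0 g)

theorem parent0_get_aux (g : List (List Bool)) : ∀ m, m ≤ sN g → ∀ c,
    ((List.range m).foldl (fun d j =>
      if pvWat g (j / sW g) (j % sW g) = true
      then d.insert (j / sW g, j % sW g) (j / sW g, j % sW g) else d)
      PySem.Dict.empty).get? c
    = if sWater g c = true ∧ sOrd g c < m then some c else none := by
  intro m
  induction m with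
  | zero =>
      intro _ c
      rw [if_neg (by rintro ⟨-, h⟩; omega)]
      simp [PySem.Dict.get?_empty]
  | succ m ih =>
      intro hm c
      have hmn : m < sN g := by omega
      rw [foldl_range_succ]
      have hcell : ((m : Nat) / sW g, m % sW g) = cellOf g m := rfl
      by_cases hw : pvWat g (m / sW g) (m % sW g) = true
      · rw [if_pos hw, PySem.Dict.get?_insert, ih (by omega) c]
        by_cases hc : c = (m / sW g, m % sW g)
        · rw [if_pos hc]
          have hwc : sWater g c = true := by
            rw [hc, hcell]
            simp only [sWater, Bool.and_eq_true, decide_eq_true_eq]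
            exact ⟨⟨(cellOf_bounds g hmn).1, (cellOf_bounds g hmn).2⟩, hw⟩
          rw [if_pos ⟨hwc, by rw [hc, hcell, sOrd_cellOf g hmn]; omega⟩, hc]
        · rw [if_neg hc]
          by_cases h1 : sWater g c = true ∧ sOrd g c < m
          · rw [if_pos h1, if_pos ⟨h1.1, by omega⟩]
          · rw [if_neg h1, if_neg (by
              rintro ⟨hwc, hlt⟩
              by_cases h2 : sOrd g c < m
              · exact h1 ⟨hwc, h2⟩
              · have : sOrd g c = m := by omega
                exact hc (by rw [d_eq_cellOf g hwc this, hcell]))]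
      · rw [if_neg hw, ih (by omega) c]
        by_cases h1 : sWater g c = true ∧ sOrd g c < m
        · rw [if_pos h1, if_pos ⟨h1.1, by omega⟩]
        · rw [if_neg h1, if_neg (by
            rintro ⟨hwc, hlt⟩
            by_cases h2 : sOrd g c < m
            · exact h1 ⟨hwc, h2⟩
            · have h3 : sOrd g c = m := by omega
              have h4 : c = cellOf g m := d_eq_cellOf g hwc h3
              apply hw
              simp only [sWater, Bool.and_eq_true] at hwc
              have h5 := hwc.2
              rw [h4] at h5
              exact h5)]

theorem parent0_get (g : List (List Bool)) (c : Nat × Nat) :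
    (parent0 g).get? c = if sWater g c = true then some c else none := by
  have h := parent0_get_aux g (sN g) le_rfl c
  rw [parent0]
  by_cases hw : sWater g c = true
  · rw [h, if_pos ⟨hw, sOrd_lt_n g hw⟩, if_pos hw]
  · rw [h, if_neg (fun hh => hw hh.1), if_neg hw]

theorem WF_parent0 (g : List (List Bool)) : WFp g (parent0 g) := by
  constructor
  · intro c
    rw [PySem.Dict.contains_eq_isSome_get?, parent0_get g c]
    by_cases hw : sWater g c = true
    · rw [if_pos hw]; simp [hw]
    · rw [if_neg hw]; simp [hw]
  · intro c v h
    rw [parent0_get g c] at h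
    by_cases hw : sWater g c = true
    · rw [if_pos hw] at h
      have hv : v = c := by injection h with h'; exact h'.symm
      rw [hv]
      refine ⟨le_rfl, ?_⟩
      rw [PySem.Dict.contains_eq_isSome_get?, parent0_get g c, if_pos hw]
      rfl
    · rw [if_neg hw] at h
      exact absurd h (by simp)

theorem eRel_succ (g : List (List Bool)) {k : Nat} (hk : k < sN g) (u v : Nat × Nat) :
    eRel g (k + 1) u v ↔ (eRel g k u v ∨
      (sWater g (cellOf g k) = true ∧ sWater g (rightC (cellOf g k)) = true ∧
        u = cellOf g k ∧ v = rightC (cellOf g k)) ∨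
      (sWater g (cellOf g k) = true ∧ sWater g (downC (cellOf g k)) = true ∧
        u = cellOf g k ∧ v = downC (cellOf g k))) := by
  constructor
  · rintro ⟨hwu, hwv, hord, hshape⟩
    by_cases h1 : sOrd g u < k
    · exact Or.inl ⟨hwu, hwv, h1, hshape⟩
    · have h2 : sOrd g u = k := by omega
      have hu : u = cellOf g k := d_eq_cellOf g hwu h2
      rcases hshape with h | h
      · exact Or.inr (Or.inl ⟨hu ▸ hwu, by rw [← hu, ← h]; exact hwv, hu, by rw [← hu]; exact h⟩)
      · exact Or.inr (Or.inr ⟨hu ▸ hwu, by rw [← hu, ← h]; exact hwv, hu, by rw [← hu]; exact h⟩)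
  · rintro (⟨hwu, hwv, hord, hshape⟩ | ⟨hwc, hwr, hu, hv⟩ | ⟨hwc, hwd, hu, hv⟩)
    · exact ⟨hwu, hwv, by omega, hshape⟩
    · refine ⟨hu ▸ hwc, hv ▸ hwr, ?_, Or.inl (by rw [hu, hv])⟩
      rw [hu, sOrd_cellOf g hk]
      omega
    · refine ⟨hu ▸ hwc, hv ▸ hwd, ?_, Or.inr (by rw [hu, hv])⟩
      rw [hu, sOrd_cellOf g hk]
      omega

theorem Rk_mono_succ (g : List (List Bool)) (k : Nat) {u v : Nat × Nat}
    (h : Rk g k u v) : Rk g (k + 1) u v := by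
  refine Relation.EqvGen.mono ?_ h
  rintro a b ⟨h1, h2, h3, h4⟩
  exact ⟨h1, h2, by omega, h4⟩

theorem unionPass (g : List (List Bool)) : ∀ k, k ≤ sN g →
    WFp g (passUpTo g k) ∧
    (∀ c v, (passUpTo g k).get? c = some v → Rk g k c v) ∧
    (∀ c d, Rk g k c d → sRoot g (passUpTo g k) c = sRoot g (passUpTo g k) d) := by
  intro k
  induction k with
  | zero =>
      intro _
      have hpe : passUpTo g 0 = parent0 g := rfl
      rw [hpe]
      refine ⟨WF_parent0 g, ?_, ?_⟩
      · intro c v h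
        rw [parent0_get g c] at h
        by_cases hw : sWater g c = true
        · rw [if_pos hw] at h
          have hv : v = c := by injection h with h'; exact h'.symm
          rw [hv]
          exact Rk_refl g 0 c
        · rw [if_neg hw] at h
          exact absurd h (by simp)
      · intro c d h
        exact eqvGen_map_eq (by rintro u v ⟨-, -, h3, -⟩; omega) c d h
  | succ k ih =>
      intro hk1
      have hk : k < sN g := by omega
      obtain ⟨hWFk, hI2k, hI3k⟩ := ih (by omega)
      have hstep : passUpTo g (k + 1)
          = pvUnionStep g (sH g) (sW g) (sH g * sW g) (passUpTo g k) (k / sW g) (k % sW g) := by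
        rw [passUpTo, passUpTo, foldl_range_succ]
      obtain ⟨p, hp⟩ : ∃ p, p = passUpTo g k := ⟨_, rfl⟩
      rw [hstep]
      rw [← hp] at hWFk hI2k hI3k ⊢
      rw [pvUnionStep,
        show ((k / sW g : Nat), (k % sW g : Nat)) = cellOf g k from rfl,
        show ((k / sW g : Nat), (k % sW g : Nat) + 1) = rightC (cellOf g k) from rfl,
        show ((k / sW g : Nat) + 1, (k % sW g : Nat)) = downC (cellOf g k) from rfl]
      by_cases hcc : p.contains (cellOf g k) = true
      case neg =>
          rw [if_neg hcc]
          have hnw : ¬ sWater g (cellOf g k) = true := fun hw => hcc ((hWFk.1 _).mpr hw)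
          have hiff : ∀ u v, Rk g (k + 1) u v ↔ Rk g k u v := by
            apply eqvGen_iff_of_iff
            intro u v
            rw [eRel_succ g hk u v]
            constructor
            · rintro (h | ⟨hwcx, -, -, -⟩ | ⟨hwcx, -, -, -⟩)
              · exact h
              · exact absurd hwcx hnw
              · exact absurd hwcx hnw
            · exact Or.inl
          exact ⟨hWFk, fun c v h => Rk_mono_succ g k (hI2k c v h),
            fun c d h => hI3k c d ((hiff c d).mp h)⟩
      case pos =>
          rw [if_pos hcc]
          have hwc : sWater g (cellOf g k) = true := (hWFk.1 _).mp hcc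
          by_cases hg1 : k % sW g + 1 < sW g ∧ p.contains (rightC (cellOf g k)) = true
          · rw [if_pos hg1]
            have hwrc : sWater g (rightC (cellOf g k)) = true := (hWFk.1 _).mp hg1.2
            obtain ⟨p1, hp1⟩ : ∃ q, q = pvUnion (sH g * sW g) p (cellOf g k) (rightC (cellOf g k)) := ⟨_, rfl⟩
            rw [← hp1]
            have u1 : WFp g p1 ∧
                (∀ c v, p1.get? c = some v →
                  Relation.EqvGen (fun u v => eRel g k u v ∨
                    (u = cellOf g k ∧ v = rightC (cellOf g k))) c v) ∧
                (∀ c d, Relation.EqvGen (fun u v => eRel g k u v ∨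
                    (u = cellOf g k ∧ v = rightC (cellOf g k))) c d →
                  sRoot g p1 c = sRoot g p1 d) := by
              rw [hp1]
              refine union_spec g hWFk hI2k hI3k
                  ?_ ?_ ?_ ?_ ?_ ?_ ?_ ?_ hwc hwrc <;> first
                  | exact fun a => Relation.EqvGen.refl a
                  | exact fun h1 h2 => Relation.EqvGen.trans _ _ _ h1 h2
                  | exact fun h => Relation.EqvGen.symm _ _ h
                  | exact fun u v h => Relation.EqvGen.mono (fun a b hab => Or.inl hab) h
                  | exact Relation.EqvGen.rel _ _ (Or.inr ⟨rfl, rfl⟩)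
                  | exact fun u v h => Relation.EqvGen.mono (fun a b hab => hab.elim
                      (fun h1 => Or.inl (Relation.EqvGen.rel _ _ h1)) Or.inr) h
            obtain ⟨hWF1, hI21, hI31⟩ := u1
            by_cases hg2 : k / sW g + 1 < sH g ∧ p1.contains (downC (cellOf g k)) = true
            · rw [if_pos hg2]
              have hwdc : sWater g (downC (cellOf g k)) = true := (hWF1.1 _).mp hg2.2
              obtain ⟨p2, hp2⟩ : ∃ q, q = pvUnion (sH g * sW g) p1 (cellOf g k) (downC (cellOf g k)) := ⟨_, rfl⟩
              rw [← hp2]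
              have u2 : WFp g p2 ∧
                  (∀ c v, p2.get? c = some v →
                    Relation.EqvGen (fun u v => (eRel g k u v ∨
                      (u = cellOf g k ∧ v = rightC (cellOf g k))) ∨
                      (u = cellOf g k ∧ v = downC (cellOf g k))) c v) ∧
                  (∀ c d, Relation.EqvGen (fun u v => (eRel g k u v ∨
                      (u = cellOf g k ∧ v = rightC (cellOf g k))) ∨
                      (u = cellOf g k ∧ v = downC (cellOf g k))) c d →
                    sRoot g p2 c = sRoot g p2 d) := by
                rw [hp2]
                refine union_spec g hWF1 hI21 hI31
                  ?_ ?_ ?_ ?_ ?_ ?_ ?_ ?_ hwc hwdc <;> first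
                  | exact fun a => Relation.EqvGen.refl a
                  | exact fun h1 h2 => Relation.EqvGen.trans _ _ _ h1 h2
                  | exact fun h => Relation.EqvGen.symm _ _ h
                  | exact fun u v h => Relation.EqvGen.mono (fun a b hab => Or.inl hab) h
                  | exact Relation.EqvGen.rel _ _ (Or.inr ⟨rfl, rfl⟩)
                  | exact fun u v h => Relation.EqvGen.mono (fun a b hab => hab.elim
                      (fun h1 => Or.inl (Relation.EqvGen.rel _ _ h1)) Or.inr) h
              obtain ⟨hWF2, hI22, hI32⟩ := u2
              have hiff : ∀ u v, Rk g (k + 1) u v ↔ Relation.EqvGen (fun u v => (eRel g k u v ∨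
                  (u = cellOf g k ∧ v = rightC (cellOf g k))) ∨
                  (u = cellOf g k ∧ v = downC (cellOf g k))) u v := by
                apply eqvGen_iff_of_iff
                intro u v
                rw [eRel_succ g hk u v]
                constructor
                · rintro (h | ⟨-, -, hu, hv⟩ | ⟨-, -, hu, hv⟩)
                  · exact Or.inl (Or.inl h)
                  · exact Or.inl (Or.inr ⟨hu, hv⟩)
                  · exact Or.inr ⟨hu, hv⟩
                · rintro ((h | ⟨hu, hv⟩) | ⟨hu, hv⟩)
                  · exact Or.inl h
                  · exact Or.inr (Or.inl ⟨hwc, hwrc, hu, hv⟩)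
                  · exact Or.inr (Or.inr ⟨hwc, hwdc, hu, hv⟩)
              exact ⟨hWF2, fun c v h => (hiff c v).mpr (hI22 c v h),
                fun c d h => hI32 c d ((hiff c d).mp h)⟩
            · rw [if_neg hg2]
              have hndc : ¬ sWater g (downC (cellOf g k)) = true := by
                intro hw
                apply hg2
                have hb := sWater_bounds g hw
                exact ⟨hb.1, (hWF1.1 _).mpr hw⟩
              have hiff : ∀ u v, Rk g (k + 1) u v ↔ Relation.EqvGen (fun u v => eRel g k u v ∨
                  (u = cellOf g k ∧ v = rightC (cellOf g k))) u v := by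
                apply eqvGen_iff_of_iff
                intro u v
                rw [eRel_succ g hk u v]
                constructor
                · rintro (h | ⟨-, -, hu, hv⟩ | ⟨-, hwd, -, -⟩)
                  · exact Or.inl h
                  · exact Or.inr ⟨hu, hv⟩
                  · exact absurd hwd hndc
                · rintro (h | ⟨hu, hv⟩)
                  · exact Or.inl h
                  · exact Or.inr (Or.inl ⟨hwc, hwrc, hu, hv⟩)
              exact ⟨hWF1, fun c v h => (hiff c v).mpr (hI21 c v h),
                fun c d h => hI31 c d ((hiff c d).mp h)⟩
          · rw [if_neg hg1]
            have hnrc : ¬ sWater g (rightC (cellOf g k)) = true := by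
              intro hw
              apply hg1
              have hb := sWater_bounds g hw
              exact ⟨hb.2, (hWFk.1 _).mpr hw⟩
            by_cases hg2 : k / sW g + 1 < sH g ∧ p.contains (downC (cellOf g k)) = true
            · rw [if_pos hg2]
              have hwdc : sWater g (downC (cellOf g k)) = true := (hWFk.1 _).mp hg2.2
              obtain ⟨p2, hp2⟩ : ∃ q, q = pvUnion (sH g * sW g) p (cellOf g k) (downC (cellOf g k)) := ⟨_, rfl⟩
              rw [← hp2]
              have u2 : WFp g p2 ∧
                  (∀ c v, p2.get? c = some v →
                    Relation.EqvGen (fun u v => eRel g k u v ∨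
                      (u = cellOf g k ∧ v = downC (cellOf g k))) c v) ∧
                  (∀ c d, Relation.EqvGen (fun u v => eRel g k u v ∨
                      (u = cellOf g k ∧ v = downC (cellOf g k))) c d →
                    sRoot g p2 c = sRoot g p2 d) := by
                rw [hp2]
                refine union_spec g hWFk hI2k hI3k
                  ?_ ?_ ?_ ?_ ?_ ?_ ?_ ?_ hwc hwdc <;> first
                  | exact fun a => Relation.EqvGen.refl a
                  | exact fun h1 h2 => Relation.EqvGen.trans _ _ _ h1 h2
                  | exact fun h => Relation.EqvGen.symm _ _ h
                  | exact fun u v h => Relation.EqvGen.mono (fun a b hab => Or.inl hab) h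
                  | exact Relation.EqvGen.rel _ _ (Or.inr ⟨rfl, rfl⟩)
                  | exact fun u v h => Relation.EqvGen.mono (fun a b hab => hab.elim
                      (fun h1 => Or.inl (Relation.EqvGen.rel _ _ h1)) Or.inr) h
              obtain ⟨hWF2, hI22, hI32⟩ := u2
              have hiff : ∀ u v, Rk g (k + 1) u v ↔ Relation.EqvGen (fun u v => eRel g k u v ∨
                  (u = cellOf g k ∧ v = downC (cellOf g k))) u v := by
                apply eqvGen_iff_of_iff
                intro u v
                rw [eRel_succ g hk u v]
                constructor
                · rintro (h | ⟨-, hwr, -, -⟩ | ⟨-, -, hu, hv⟩)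
                  · exact Or.inl h
                  · exact absurd hwr hnrc
                  · exact Or.inr ⟨hu, hv⟩
                · rintro (h | ⟨hu, hv⟩)
                  · exact Or.inl h
                  · exact Or.inr (Or.inr ⟨hwc, hwdc, hu, hv⟩)
              exact ⟨hWF2, fun c v h => (hiff c v).mpr (hI22 c v h),
                fun c d h => hI32 c d ((hiff c d).mp h)⟩
            · rw [if_neg hg2]
              have hndc : ¬ sWater g (downC (cellOf g k)) = true := by
                intro hw
                apply hg2
                have hb := sWater_bounds g hw
                exact ⟨hb.1, (hWFk.1 _).mpr hw⟩
              have hiff : ∀ u v, Rk g (k + 1) u v ↔ Rk g k u v := by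
                apply eqvGen_iff_of_iff
                intro u v
                rw [eRel_succ g hk u v]
                constructor
                · rintro (h | ⟨-, hwr, -, -⟩ | ⟨-, hwd, -, -⟩)
                  · exact h
                  · exact absurd hwr hnrc
                  · exact absurd hwd hndc
                · exact Or.inl
              exact ⟨hWFk, fun c v h => Rk_mono_succ g k (hI2k c v h),
                fun c d h => hI3k c d ((hiff c d).mp h)⟩

-- ---- the final forest: roots are the row-major minima of the components ----
def pInf (g : List (List Bool)) : PySem.Dict (Nat × Nat) (Nat × Nat) := passUpTo g (sN g)

def finRoot (g : List (List Bool)) (c : Nat × Nat) : Nat × Nat := sRoot g (pInf g) c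

theorem WF_pInf (g : List (List Bool)) : WFp g (pInf g) := (unionPass g (sN g) le_rfl).1

theorem shape_adj (g : List (List Bool)) {u v : Nat × Nat} (hu : sWater g u = true)
    (hv : sWater g v = true) (h : v = rightC u ∨ v = downC u) : sAdj g u v := by
  refine ⟨hu, hv, ?_⟩
  rcases h with h | h
  · exact Or.inl ⟨(congrArg Prod.fst h).symm, Or.inl (congrArg Prod.snd h).symm⟩
  · exact Or.inr ⟨(congrArg Prod.snd h).symm, Or.inl (congrArg Prod.fst h).symm⟩

theorem Rn_iff (g : List (List Bool)) : ∀ u v, Rk g (sN g) u v ↔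
    (u = v ∨ (sWater g u = true ∧ sWater g v = true ∧ sConn g u v)) := by
  intro u v
  constructor
  · intro h
    induction h with
    | rel x y e =>
        exact Or.inr ⟨e.1, e.2.1,
          Relation.ReflTransGen.single (shape_adj g e.1 e.2.1 e.2.2.2)⟩
    | refl x => exact Or.inl rfl
    | symm x y _ ih =>
        rcases ih with h | ⟨h1, h2, h3⟩
        · exact Or.inl h.symm
        · exact Or.inr ⟨h2, h1, sConn_symm g h3⟩
    | trans x y z _ _ ih1 ih2 =>
        rcases ih1 with h | ⟨h1, h2, h3⟩
        · rw [h]; exact ih2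
        · rcases ih2 with h' | ⟨h1', h2', h3'⟩
          · rw [← h']; exact Or.inr ⟨h1, h2, h3⟩
          · exact Or.inr ⟨h1, h2', Relation.ReflTransGen.trans h3 h3'⟩
  · rintro (h | ⟨h1, h2, h3⟩)
    · rw [h]; exact Rk_refl g _ v
    · clear h2
      induction h3 with
      | refl => exact Rk_refl g _ u
      | @tail c d hconn hadj ih =>
          refine Rk_trans g _ ih ?_
          obtain ⟨hwc, hwd, hshape⟩ := hadj
          have hordc : sOrd g c < sN g := sOrd_lt_n g hwc
          have hordd : sOrd g d < sN g := sOrd_lt_n g hwd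
          rcases hshape with ⟨e1, e2 | e2⟩ | ⟨e1, e2 | e2⟩
          · exact Relation.EqvGen.rel _ _
              ⟨hwc, hwd, hordc, Or.inl (Prod.ext e1.symm e2.symm)⟩
          · refine Relation.EqvGen.symm _ _ (Relation.EqvGen.rel _ _
              ⟨hwd, hwc, hordd, Or.inl ?_⟩)
            exact Prod.ext e1 e2.symm
          · exact Relation.EqvGen.rel _ _
              ⟨hwc, hwd, hordc, Or.inr (Prod.ext e2.symm e1.symm)⟩
          · refine Relation.EqvGen.symm _ _ (Relation.EqvGen.rel _ _
              ⟨hwd, hwc, hordd, Or.inr ?_⟩)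
            exact Prod.ext e2.symm e1

theorem finRoot_water (g : List (List Bool)) {c : Nat × Nat} (hc : sWater g c = true) :
    sWater g (finRoot g c) = true :=
  ((WF_pInf g).1 _).mp (contains_sRoot g (WF_pInf g) (((WF_pInf g).1 c).mpr hc))

theorem finRoot_conn (g : List (List Bool)) {c : Nat × Nat} (hc : sWater g c = true) :
    sConn g c (finRoot g c) := by
  have h := R_sRoot g (WF_pInf g) (unionPass g (sN g) le_rfl).2.1
    (Rk_refl g (sN g)) (fun h1 h2 => Rk_trans g (sN g) h1 h2) c
  rcases (Rn_iff g c (finRoot g c)).mp h with h1 | ⟨-, -, h3⟩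
  · rw [← h1]
    exact Relation.ReflTransGen.refl
  · exact h3

theorem finRoot_eq_of_conn (g : List (List Bool)) {c d : Nat × Nat}
    (hc : sWater g c = true) (h : sConn g c d) : finRoot g c = finRoot g d := by
  exact (unionPass g (sN g) le_rfl).2.2 c d
    ((Rn_iff g c d).mpr (Or.inr ⟨hc, sConn_water g h hc, h⟩))

theorem finRoot_min (g : List (List Bool)) {c d : Nat × Nat} (hc : sWater g c = true)
    (h : sConn g c d) : sOrd g (finRoot g c) ≤ sOrd g d := by
  rw [finRoot_eq_of_conn g hc h]
  exact ord_sRoot_le g (WF_pInf g) d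

theorem finRoot_rep (g : List (List Bool)) {c : Nat × Nat} (hc : sWater g c = true) :
    sRep g (finRoot g c) := by
  refine ⟨finRoot_water g hc, ?_⟩
  intro d hconn
  have h1 : sConn g c d := Relation.ReflTransGen.trans (finRoot_conn g hc) hconn
  have h2 := finRoot_min g hc h1
  have h3 : finRoot g c = finRoot g (finRoot g c) :=
    finRoot_eq_of_conn g hc (finRoot_conn g hc)
  rw [h3] at h2 ⊢
  have h4 : sConn g (finRoot g c) d := hconn
  calc sOrd g (finRoot g (finRoot g c)) ≤ sOrd g d :=
    finRoot_min g (finRoot_water g hc) hconn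

theorem rep_finRoot (g : List (List Bool)) {r : Nat × Nat} (hr : sRep g r) :
    finRoot g r = r := by
  have h1 := finRoot_min g hr.1 (Relation.ReflTransGen.refl)
  have h2 := hr.2 (finRoot g r) (finRoot_conn g hr.1)
  exact sOrd_inj g (sWater_bounds g (finRoot_water g hr.1)).2 (sWater_bounds g hr.1).2
    (by omega)

theorem finRoot_eq_iff (g : List (List Bool)) {c r : Nat × Nat}
    (hc : sWater g c = true) (hr : sRep g r) :
    finRoot g c = r ↔ sConn g r c := by
  constructor
  · intro h
    exact sConn_symm g (h ▸ finRoot_conn g hc)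
  · intro h
    rw [finRoot_eq_of_conn g hc (sConn_symm g h), rep_finRoot g hr]

-- counting and edge flags accumulated by the aggregation pass
def aggP (g : List (List Bool)) (r : Nat × Nat) (j : Nat) : Bool :=
  sWater g (cellOf g j) && (finRoot g (cellOf g j) == r)

def cntUp (g : List (List Bool)) (k : Nat) (r : Nat × Nat) : Nat :=
  ((List.range k).filter (aggP g r)).length

def tcUp (g : List (List Bool)) (k : Nat) (r : Nat × Nat) : Bool :=
  ((List.range k).filter (aggP g r)).any (fun j => sBorder g (cellOf g j))

theorem cnt_succ (g : List (List Bool)) (k : Nat) (r : Nat × Nat) :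
    cntUp g (k + 1) r = cntUp g k r + (if aggP g r k = true then 1 else 0) := by
  rw [cntUp, cntUp, List.range_succ, List.filter_append, List.length_append]
  congr 1
  by_cases h : aggP g r k = true
  · rw [if_pos h]
    simp [h]
  · rw [if_neg h]
    simp [h]

theorem tc_succ (g : List (List Bool)) (k : Nat) (r : Nat × Nat) :
    tcUp g (k + 1) r = (tcUp g k r || (aggP g r k && sBorder g (cellOf g k))) := by
  rw [tcUp, tcUp, List.range_succ, List.filter_append, List.any_append]
  by_cases h : aggP g r k = true <;> simp [h]

theorem cnt_eq_card (g : List (List Bool)) {r : Nat × Nat} (hr : sRep g r) :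
    cntUp g (sN g) r = (sComp g r).card := by
  have hmem : ∀ j, j ∈ (List.range (sN g)).filter (aggP g r) ↔
      (j < sN g ∧ sWater g (cellOf g j) = true ∧ finRoot g (cellOf g j) = r) := by
    intro j
    simp [List.mem_filter, List.mem_range, aggP, Bool.and_eq_true, beq_iff_eq, and_assoc]
  have h1 : ((List.range (sN g)).filter (aggP g r)).toFinset
      = (sComp g r).image (sOrd g) := by
    apply Finset.ext
    intro j
    rw [List.mem_toFinset, hmem j, Finset.mem_image]
    constructor
    · rintro ⟨hj, hw, hroot⟩
      refine ⟨cellOf g j, ?_, sOrd_cellOf g hj⟩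
      rw [mem_sComp g hr.1]
      exact (finRoot_eq_iff g hw hr).mp hroot
    · rintro ⟨c, hc, hord⟩
      have hconn : sConn g r c := (mem_sComp g hr.1).mp hc
      have hwc : sWater g c = true := sConn_water g hconn hr.1
      have hj : j < sN g := by rw [← hord]; exact sOrd_lt_n g hwc
      have hcell : cellOf g j = c := by rw [← hord, cellOf_sOrd g (sWater_bounds g hwc).2]
      rw [hcell]
      exact ⟨hj, hwc, (finRoot_eq_iff g hwc hr).mpr hconn⟩
  have h2 : ((List.range (sN g)).filter (aggP g r)).toFinset.card
      = ((List.range (sN g)).filter (aggP g r)).length :=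
    List.toFinset_card_of_nodup ((List.nodup_range).filter _)
  have h3 : ((sComp g r).image (sOrd g)).card = (sComp g r).card := by
    apply Finset.card_image_of_injOn
    intro a ha b hb hab
    have hwa : sWater g a = true := sConn_water g ((mem_sComp g hr.1).mp ha) hr.1
    have hwb : sWater g b = true := sConn_water g ((mem_sComp g hr.1).mp hb) hr.1
    exact sOrd_inj g (sWater_bounds g hwa).2 (sWater_bounds g hwb).2 hab
  rw [cntUp, ← h2, h1, h3]

theorem tc_eq_edge (g : List (List Bool)) {r : Nat × Nat} (hr : sRep g r) :
    tcUp g (sN g) r = sEdgeB g r := by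
  have hiff : tcUp g (sN g) r = true ↔ (∃ d ∈ sComp g r, sBorder g d = true) := by
    rw [tcUp, List.any_eq_true]
    constructor
    · rintro ⟨j, hj, hb⟩
      rw [List.mem_filter, List.mem_range] at hj
      obtain ⟨hjn, hpred⟩ := hj
      simp only [aggP, Bool.and_eq_true, beq_iff_eq] at hpred
      refine ⟨cellOf g j, ?_, hb⟩
      rw [mem_sComp g hr.1]
      exact (finRoot_eq_iff g hpred.1 hr).mp hpred.2
    · rintro ⟨d, hd, hb⟩
      have hconn : sConn g r d := (mem_sComp g hr.1).mp hd
      have hwd : sWater g d = true := sConn_water g hconn hr.1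
      refine ⟨sOrd g d, ?_, ?_⟩
      · rw [List.mem_filter, List.mem_range]
        refine ⟨sOrd_lt_n g hwd, ?_⟩
        simp only [aggP, Bool.and_eq_true, beq_iff_eq]
        rw [cellOf_sOrd g (sWater_bounds g hwd).2]
        exact ⟨hwd, (finRoot_eq_iff g hwd hr).mpr hconn⟩
      · rw [cellOf_sOrd g (sWater_bounds g hwd).2]
        exact hb
  have hedge : sEdgeB g r = true ↔ (∃ d ∈ sComp g r, sBorder g d = true) := by
    rw [sEdgeB]
    exact @decide_eq_true_iff _ (Classical.propDecidable _)
  cases h1 : tcUp g (sN g) r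
  · cases h2 : sEdgeB g r
    · rfl
    · exact absurd (hiff.mpr (hedge.mp h2)) (by rw [h1]; simp)
  · exact (hedge.mpr (hiff.mp h1)).symm

-- ---- the aggregation pass ----
def aggFold (g : List (List Bool)) (k : Nat) :
    PySem.Dict (Nat × Nat) (Nat × Nat) × PySem.Dict (Nat × Nat) Nat ×
      PySem.Dict (Nat × Nat) Bool :=
  (List.range k).foldl (fun st j => pvAggStep (sH g) (sW g) (sH g * sW g) st (j / sW g) (j % sW g))
    (pInf g, (PySem.Dict.empty : PySem.Dict (Nat × Nat) Nat),
      (PySem.Dict.empty : PySem.Dict (Nat × Nat) Bool))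

theorem repsIdx_lt (g : List (List Bool)) (k : Nat) : ∀ j ∈ sRepsIdx g k, j < k := by
  intro j hj
  rw [sRepsIdx, List.mem_filter, List.mem_range] at hj
  exact hj.1

theorem repsIdx_nodup (g : List (List Bool)) (k : Nat) : (sRepsIdx g k).Nodup :=
  (List.nodup_range).filter _

theorem repsIdx_cell_nodup (g : List (List Bool)) {k : Nat} (hk : k ≤ sN g) :
    ((sRepsIdx g k).map (cellOf g)).Nodup := by
  refine List.Nodup.map_on ?_ (repsIdx_nodup g k)
  intro x hx y hy hxy
  have hx' := repsIdx_lt g k x hx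
  have hy' := repsIdx_lt g k y hy
  have h1 := sOrd_cellOf g (k := x) (by omega)
  have h2 := sOrd_cellOf g (k := y) (by omega)
  rw [← h1, ← h2, hxy]

theorem mem_repsIdx_of_rep (g : List (List Bool)) {k : Nat} {r : Nat × Nat}
    (hr : sRep g r) (hlt : sOrd g r < k) :
    sOrd g r ∈ sRepsIdx g k ∧ cellOf g (sOrd g r) = r := by
  have hcell : cellOf g (sOrd g r) = r := cellOf_sOrd g (sWater_bounds g hr.1).2
  refine ⟨?_, hcell⟩
  rw [sRepsIdx, List.mem_filter, List.mem_range]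
  refine ⟨hlt, ?_⟩
  rw [hcell]
  exact (sRepB_iff g r).mpr hr

theorem aggPass (g : List (List Bool)) : ∀ k, k ≤ sN g →
    WFp g (aggFold g k).1 ∧
    (∀ d, sRoot g (aggFold g k).1 d = finRoot g d) ∧
    (aggFold g k).2.1.items
      = (sRepsIdx g k).map (fun j => (cellOf g j, cntUp g k (cellOf g j))) ∧
    (aggFold g k).2.2.items
      = (sRepsIdx g k).map (fun j => (cellOf g j, tcUp g k (cellOf g j))) := by
  have hbool5 : ∀ (p a b c d : Bool),
      (p || a || b || c || d) = (p || (a || b || c || d)) := by decide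
  intro k
  induction k with
  | zero =>
      intro _
      exact ⟨WF_pInf g, fun d => rfl, rfl, rfl⟩
  | succ k ih =>
      intro hk1
      have hk : k < sN g := by omega
      obtain ⟨hWFk, hrootsk, hszk, htck⟩ := ih (by omega)
      have hstep : aggFold g (k + 1)
          = pvAggStep (sH g) (sW g) (sH g * sW g) (aggFold g k) (k / sW g) (k % sW g) := by
        rw [aggFold, aggFold, foldl_range_succ]
      obtain ⟨st, hst⟩ : ∃ st, st = aggFold g k := ⟨_, rfl⟩
      rw [hstep]
      rw [← hst] at hWFk hrootsk hszk htck ⊢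
      rw [pvAggStep, show ((k / sW g : Nat), (k % sW g : Nat)) = cellOf g k from rfl]
      have hszkeys : st.2.1.keys = (sRepsIdx g k).map (cellOf g) := by
        show st.2.1.items.map (·.1) = _
        rw [hszk, List.map_map]
        rfl
      have htckeys : st.2.2.keys = (sRepsIdx g k).map (cellOf g) := by
        show st.2.2.items.map (·.1) = _
        rw [htck, List.map_map]
        rfl
      by_cases hcc : st.1.contains (cellOf g k) = true
      case neg =>
          rw [if_neg hcc]
          have hnw : ¬ sWater g (cellOf g k) = true := fun hw => hcc ((hWFk.1 _).mpr hw)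
          have hnorep : sRepB g (cellOf g k) = false := by
            rw [Bool.eq_false_iff]
            intro hrp
            exact hnw ((sRepB_iff g _).mp hrp).1
          have hreps : sRepsIdx g (k + 1) = sRepsIdx g k := by
            rw [sRepsIdx_succ, hnorep]
            simp
          have hagg : ∀ r, aggP g r k = false := by
            intro r
            rw [aggP, Bool.eq_false_iff]
            intro hq
            rw [Bool.and_eq_true] at hq
            exact hnw hq.1
          refine ⟨hWFk, hrootsk, ?_, ?_⟩
          · rw [hszk, hreps]
            apply List.map_congr_left
            intro j hj
            rw [cnt_succ, hagg]
            simp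
          · rw [htck, hreps]
            apply List.map_congr_left
            intro j hj
            rw [tc_succ, hagg]
            simp
      case pos =>
          rw [if_pos hcc]
          dsimp only
          have hwc : sWater g (cellOf g k) = true := (hWFk.1 _).mp hcc
          have hfind := find_spec g (R := fun _ _ => True) (fun a => trivial)
            (fun _ _ => trivial) (sH g * sW g + 1) st.1 (cellOf g k) hWFk
            (fun _ _ _ => trivial) hcc
            (by rw [sOrd_cellOf g hk]; exact Nat.lt_succ_of_lt hk)
          have hr2 : (pvFind (sH g * sW g + 1) st.1 (cellOf g k)).2 = finRoot g (cellOf g k) := by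
            rw [hfind.1, hrootsk]
          have hWF' : WFp g (pvFind (sH g * sW g + 1) st.1 (cellOf g k)).1 := hfind.2.1
          have hroots' : ∀ d, sRoot g (pvFind (sH g * sW g + 1) st.1 (cellOf g k)).1 d
              = finRoot g d := by
            intro d
            rw [hfind.2.2.2 d, hrootsk]
          rw [hr2]
          obtain ⟨r, hrdef⟩ : ∃ r, r = finRoot g (cellOf g k) := ⟨_, rfl⟩
          rw [← hrdef]
          have hrrep : sRep g r := hrdef ▸ finRoot_rep g hwc
          have hordr : sOrd g r ≤ k := by
            rw [hrdef]
            have h1 := ord_sRoot_le g (WF_pInf g) (cellOf g k)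
            rw [sOrd_cellOf g hk] at h1
            exact h1
          have haggr : aggP g r k = true := by
            rw [aggP, Bool.and_eq_true]
            exact ⟨hwc, by rw [hrdef]; exact beq_self_eq_true _⟩
          have haggother : ∀ r', r' ≠ r → aggP g r' k = false := by
            intro r' hne
            rw [aggP, Bool.eq_false_iff]
            intro hq
            rw [Bool.and_eq_true, beq_iff_eq] at hq
            exact hne (by rw [← hq.2, hrdef])
          have hbord : sBorder g (cellOf g k)
              = (k % sW g == 0 || k / sW g == 0 || k % sW g == sW g - 1
                  || k / sW g == sH g - 1) := rfl
          by_cases hrc : r = cellOf g k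
          · -- fresh representative
            have hordrk : sOrd g r = k := by rw [hrc, sOrd_cellOf g hk]
            have hnotmem : r ∉ (sRepsIdx g k).map (cellOf g) := by
              intro hmem
              obtain ⟨j, hj, hcj⟩ := List.mem_map.mp hmem
              have hjk := repsIdx_lt g k j hj
              have h1 : sOrd g (cellOf g j) = j := sOrd_cellOf g (by omega)
              rw [hcj, hordrk] at h1
              omega
            have hsznew : st.2.1.contains r = false := by
              rw [PySem.Dict.contains_eq_decide_mem_keys, hszkeys, decide_eq_false_iff_not]
              exact hnotmem
            have htcnew : st.2.2.contains r = false := by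
              rw [PySem.Dict.contains_eq_decide_mem_keys, htckeys, decide_eq_false_iff_not]
              exact hnotmem
            have hrepc : sRep g (cellOf g k) := hrc ▸ hrrep
            have hreps : sRepsIdx g (k + 1) = sRepsIdx g k ++ [k] := by
              rw [sRepsIdx_succ, if_pos ((sRepB_iff g _).mpr hrepc)]
            have hfilnil : (List.range k).filter (aggP g r) = [] := by
              rw [List.filter_eq_nil_iff]
              intro j hj
              rw [List.mem_range] at hj
              rw [Bool.not_eq_true, aggP, Bool.eq_false_iff]
              intro hq
              rw [Bool.and_eq_true, beq_iff_eq] at hq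
              have h1 := ord_sRoot_le g (WF_pInf g) (cellOf g j)
              rw [show sRoot g (pInf g) (cellOf g j) = finRoot g (cellOf g j) from rfl,
                hq.2, sOrd_cellOf g (by omega)] at h1
              omega
            have hcnt0 : cntUp g k r = 0 := by rw [cntUp, hfilnil]; rfl
            have htc0 : tcUp g k r = false := by rw [tcUp, hfilnil]; rfl
            have hothers : ∀ j ∈ sRepsIdx g k, aggP g (cellOf g j) k = false := by
              intro j hj
              refine haggother (cellOf g j) ?_
              intro he
              have hjk := repsIdx_lt g k j hj
              have h1 : sOrd g (cellOf g j) = j := sOrd_cellOf g (by omega)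
              rw [he, hordrk] at h1
              omega
            refine ⟨hWF', hroots', ?_, ?_⟩
            · rw [PySem.Dict.items_insert_of_not_contains _ _ hsznew, hszk,
                PySem.Dict.getD_of_not_contains _ 0 hsznew, hreps, List.map_append]
              congr 1
              · apply List.map_congr_left
                intro j hj
                rw [cnt_succ, hothers j hj]
                simp
              · simp only [List.map_cons, List.map_nil]
                rw [show cellOf g k = r from hrc.symm, cnt_succ, hcnt0, haggr]
                simp
            · rw [PySem.Dict.items_insert_of_not_contains _ _ htcnew, htck,
                PySem.Dict.getD_of_not_contains _ false htcnew, hreps, List.map_append]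
              congr 1
              · apply List.map_congr_left
                intro j hj
                rw [tc_succ, hothers j hj]
                simp
              · simp only [List.map_cons, List.map_nil]
                rw [show cellOf g k = r from hrc.symm, tc_succ, htc0, haggr,
                  Bool.true_and, hbord, hbool5]
          · -- existing representative
            have hordlt : sOrd g r < k := by
              rcases Nat.lt_or_ge (sOrd g r) k with h | h
              · exact h
              · exfalso
                have h1 : sOrd g r = k := by omega
                exact hrc (d_eq_cellOf g hrrep.1 h1)
            obtain ⟨hjmem, hjcell⟩ := mem_repsIdx_of_rep g hrrep hordlt
            have hszmem : (r, cntUp g k r) ∈ st.2.1.items := by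
              rw [hszk]
              refine List.mem_map.mpr ⟨sOrd g r, hjmem, ?_⟩
              rw [hjcell]
            have htcmem : (r, tcUp g k r) ∈ st.2.2.items := by
              rw [htck]
              refine List.mem_map.mpr ⟨sOrd g r, hjmem, ?_⟩
              rw [hjcell]
            have hsznodup : st.2.1.keys.Nodup := by
              rw [hszkeys]; exact repsIdx_cell_nodup g (by omega)
            have htcnodup : st.2.2.keys.Nodup := by
              rw [htckeys]; exact repsIdx_cell_nodup g (by omega)
            have hszcont : st.2.1.contains r = true := by
              rw [PySem.Dict.contains_eq_decide_mem_keys, hszkeys, decide_eq_true_iff]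
              exact List.mem_map.mpr ⟨sOrd g r, hjmem, hjcell⟩
            have htccont : st.2.2.contains r = true := by
              rw [PySem.Dict.contains_eq_decide_mem_keys, htckeys, decide_eq_true_iff]
              exact List.mem_map.mpr ⟨sOrd g r, hjmem, hjcell⟩
            have hszgetD : st.2.1.getD r 0 = cntUp g k r :=
              PySem.Dict.getD_of_mem_items _ hszmem hsznodup 0
            have htcgetD : st.2.2.getD r false = tcUp g k r :=
              PySem.Dict.getD_of_mem_items _ htcmem htcnodup false
            have hnorep : sRepB g (cellOf g k) = false := by
              rw [Bool.eq_false_iff]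
              intro hrp
              have := rep_finRoot g ((sRepB_iff g _).mp hrp)
              rw [← hrdef] at this
              exact hrc this
            have hreps : sRepsIdx g (k + 1) = sRepsIdx g k := by
              rw [sRepsIdx_succ, hnorep]
              simp
            refine ⟨hWF', hroots', ?_, ?_⟩
            · rw [PySem.Dict.items_insert_of_contains _ _ hszcont, hszk, hreps,
                List.map_map, hszgetD]
              apply List.map_congr_left
              intro j hj
              simp only [Function.comp_apply]
              by_cases hje : cellOf g j = r
              · rw [if_pos (by rw [hje]; exact beq_self_eq_true r), hje,
                  cnt_succ, haggr]
                rfl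
              · rw [if_neg (by simp [hje]), cnt_succ, haggother _ hje]
                simp
            · rw [PySem.Dict.items_insert_of_contains _ _ htccont, htck, hreps,
                List.map_map, htcgetD]
              apply List.map_congr_left
              intro j hj
              simp only [Function.comp_apply]
              by_cases hje : cellOf g j = r
              · rw [if_pos (by rw [hje]; exact beq_self_eq_true r), hje,
                  tc_succ, haggr, hbool5, hbord, Bool.true_and]
              · rw [if_neg (by simp [hje]), tc_succ, haggother _ hje]
                simp

-- port B computes the canonical aggregation
theorem portB_eq (g : List (List Bool)) :
    water_components_py_alt g
      = (((sTarget g).1 : Int), ((sTarget g).2.1 : Int), ((sTarget g).2.2 : Int)) := by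
  simp only [water_components_py_alt]
  rw [pvW_eq, nested_eq_single, nested_eq_single, nested_eq_single]
  have h1 : (List.range (g.length * sW g)).foldl
      (fun d k => if pvWat g (k / sW g) (k % sW g) = true
        then d.insert (k / sW g, k % sW g) (k / sW g, k % sW g) else d)
      PySem.Dict.empty
      = parent0 g := rfl
  rw [h1]
  have h2 : (List.range (g.length * sW g)).foldl
      (fun d k => pvUnionStep g g.length (sW g) (g.length * sW g) d (k / sW g) (k % sW g))
      (parent0 g)
      = pInf g := rfl
  rw [h2]
  have h3 : (List.range (g.length * sW g)).foldl
      (fun st k => pvAggStep g.length (sW g) (g.length * sW g) st (k / sW g) (k % sW g))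
      (pInf g, (PySem.Dict.empty : PySem.Dict (Nat × Nat) Nat),
        (PySem.Dict.empty : PySem.Dict (Nat × Nat) Bool))
      = aggFold g (sN g) := rfl
  rw [h3]
  obtain ⟨hWFn, hrootsn, hszn, htcn⟩ := aggPass g (sN g) le_rfl
  have htckeys : (aggFold g (sN g)).2.2.keys = (sRepsIdx g (sN g)).map (cellOf g) := by
    show (aggFold g (sN g)).2.2.items.map (·.1) = _
    rw [htcn, List.map_map]
    rfl
  have htcnodup : (aggFold g (sN g)).2.2.keys.Nodup := by
    rw [htckeys]
    exact repsIdx_cell_nodup g le_rfl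
  have hgetTC : ∀ j ∈ sRepsIdx g (sN g),
      (aggFold g (sN g)).2.2.getD (cellOf g j) false = tcUp g (sN g) (cellOf g j) := by
    intro j hj
    refine PySem.Dict.getD_of_mem_items _ ?_ htcnodup false
    rw [htcn]
    exact List.mem_map.mpr ⟨j, hj, rfl⟩
  have hrepj : ∀ j ∈ sRepsIdx g (sN g), sRep g (cellOf g j) := by
    intro j hj
    rw [sRepsIdx, List.mem_filter] at hj
    exact (sRepB_iff g _).mp hj.2
  have hfold : ((aggFold g (sN g)).2.1.items).foldl
      (fun acc p => if (aggFold g (sN g)).2.2.getD p.1 false = true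
        then (acc.1 + p.2, acc.2.1, acc.2.2 + 1)
        else if p.2 ≥ max 16 (sW g * g.length / 2000) then (acc.1, acc.2.1 + 1, acc.2.2)
        else acc) ((0, 0, 0) : Nat × Nat × Nat)
      = sTarget g := by
    rw [hszn, List.foldl_map, sTarget, List.foldl_map]
    apply PySem.List.foldl_congr_mem
    intro acc j hj
    rw [hgetTC j hj, tc_eq_edge g (hrepj j hj), cnt_eq_card g (hrepj j hj)]
    rfl
  rw [hfold]

-- ===== VERDICT (by name: the statement is the Claim_ definition above) =====
theorem water_components_py_spec : Claim_equal_water_components_py := by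
  intro g _ _
  unfold Spec_water_components_py
  rw [portA_eq, portB_eq]
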